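-- pv_equiv track=rewrite | github.com/Ag3497120/verantyx-v6 | synth_results/228f6490.py | transform
-- ===== SOURCE A (Python) =====
-- def transform(grid):
--     h = len(grid)
--     w = len(grid[0])
--
--     # Helper: BFS to get connected component
--     def bfs(sr, sc, visited, color):
--         component = []
--         stack = [(sr, sc)]
--         visited[sr][sc] = True
--         while stack:
--             r, c = stack.pop()
--             component.append((r, c))
--             for dr, dc in [(1,0),(-1,0),(0,1),(0,-1)]:
--                 nr, nc = r + dr, c + dc
--                 if 0 <= nr < h and 0 <= nc < w and not visited[nr][nc] and grid[nr][nc] == color: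
--                     visited[nr][nc] = True
--                     stack.append((nr, nc))
--         return component
--
--     # Find all connected components
--     visited = [[False]*w for _ in range(h)]
--     color_to_components = {}
--     for r in range(h):
--         for c in range(w):
--             if grid[r][c] != 0 and not visited[r][c]:
--                 color = grid[r][c]
--                 comp = bfs(r, c, visited, color)
--                 if color not in color_to_components:
--                     color_to_components[color] = []
--                 color_to_components[color].append(comp)
--
--     # Find largest component for each color
--     largest_comp = {}
--     for color, comps in color_to_components.items():
--         largest = max(comps, key=len)
--         largest_comp[color] = largest
--
--     # Check adjacency between largest components of different colors
--     colors = list(largest_comp.keys())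
--     source_color = None
--     target_color = None
--
--     for i in range(len(colors)):
--         for j in range(len(colors)):
--             if i == j:
--                 continue
--             color_a = colors[i]
--             color_b = colors[j]
--             comp_a = largest_comp[color_a]
--             comp_b = largest_comp[color_b]
--
--             # Check if any pixel in comp_a is adjacent to any pixel in comp_b
--             adjacent = False
--             for ra, ca in comp_a:
--                 for dr, dc in [(1,0),(-1,0),(0,1),(0,-1)]:
--                     nr, nc = ra + dr, ca + dc
--                     if (nr, nc) in comp_b:
--                         adjacent = True
--                         break
--                 if adjacent:
--                     break
--
--             if adjacent:
--                 source_color = color_a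
--                 target_color = color_b
--                 break
--         if source_color is not None:
--             break
--
--     # Create output grid (start as copy of input)
--     output = [row[:] for row in grid]
--
--     if source_color is not None and target_color is not None:
--         # Remove source block (set to 0)
--         for r, c in largest_comp[source_color]:
--             output[r][c] = 0
--         # Recolor target block to source_color
--         for r, c in largest_comp[target_color]:
--             output[r][c] = source_color
--
--     return output
-- ===== SOURCE B (Python) =====
-- def transform(grid):
--     h, w = len(grid), len(grid[0])
--     # min-label relaxation: each nonzero cell's label converges to the smallest
--     # row-major index in its same-color 4-connected component (no flood fill)
--     label = {(r, c): r * w + c for r in range(h) for c in range(w) if grid[r][c] != 0}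
--     changed = True
--     while changed:
--         changed = False
--         for (r, c), l in label.items():
--             for q in ((r - 1, c), (r + 1, c), (r, c - 1), (r, c + 1)):
--                 if q in label and grid[q[0]][q[1]] == grid[r][c] and label[q] < l:
--                     l = label[q]
--             if l < label[(r, c)]:
--                 label[(r, c)] = l
--                 changed = True
--     size = {}
--     for root in label.values():
--         size[root] = size.get(root, 0) + 1
--     # per color: root of its largest component (ties -> smallest root)
--     rep = {}
--     for (r, c), root in label.items():
--         col = grid[r][c]
--         if col not in rep or size[root] > size[rep[col]] or \
--                 (size[root] == size[rep[col]] and root < rep[col]):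
--             rep[col] = root
--     colors = list(rep)
--     pair = next(((ca, cb) for ca in colors for cb in colors
--                  if ca != cb and any(label.get(q) == rep[cb]
--                                      for (r, c), root in label.items() if root == rep[ca]
--                                      for q in ((r + 1, c), (r - 1, c), (r, c + 1), (r, c - 1)))),
--                 None)
--     if pair is None:
--         return [row[:] for row in grid]
--     src, tgt = pair
--     return [[0 if label.get((r, c)) == rep[src] else
--              (src if label.get((r, c)) == rep[tgt] else v)
--              for c, v in enumerate(row)]
--             for r, row in enumerate(grid)]
-- ===== Notes on version B (the rewrite author's own statement) =====
-- stated objective: alternative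
-- what changed: Components are never flood-filled: B computes, for every nonzero cell, a label that relaxes to the smallest row-major index of its same-color 4-connected component by iterating a min-over-neighbours propagation to a fixpoint, then derives component sizes by counting labels, picks per color the root of the largest component (ties to the smallest root) by an argmax over the label map, tests adjacency and rebuilds the output purely by label lookups -- no BFS/DFS, no visited matrix, no component lists.
import Mathlib
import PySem

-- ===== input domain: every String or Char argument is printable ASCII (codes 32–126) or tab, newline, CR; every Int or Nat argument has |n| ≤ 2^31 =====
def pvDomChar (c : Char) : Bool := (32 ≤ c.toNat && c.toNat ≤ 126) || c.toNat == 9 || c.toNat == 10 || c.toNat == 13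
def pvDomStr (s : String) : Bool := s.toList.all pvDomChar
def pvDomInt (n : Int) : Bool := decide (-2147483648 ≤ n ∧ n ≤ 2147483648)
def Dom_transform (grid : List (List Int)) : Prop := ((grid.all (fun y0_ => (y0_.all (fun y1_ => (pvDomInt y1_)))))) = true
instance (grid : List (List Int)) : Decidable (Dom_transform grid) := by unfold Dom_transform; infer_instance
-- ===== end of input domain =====

-- B never flood-fills: it relaxes a per-cell min-index label to a fixpoint to identify components,
-- then works purely on the label map ("alternative"; no speed claim).

-- ===== PORT A =====
-- shared index helpers (both Pythons perform the same bounds-guarded indexing)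
def pvNbrs (x : Int × Int) : List (Int × Int) :=
  [(x.1 + 1, x.2), (x.1 - 1, x.2), (x.1, x.2 + 1), (x.1, x.2 - 1)]

def pvInB (h w : Int) (x : Int × Int) : Bool :=
  decide (0 ≤ x.1) && decide (x.1 < h) && decide (0 ≤ x.2) && decide (x.2 < w)

-- grid[r][c]; exact for the guarded in-bounds accesses both programs perform
def pvVal (grid : List (List Int)) (x : Int × Int) : Int :=
  PySem.List.pyGetD (PySem.List.pyGetD grid x.1 []) x.2 0

-- row-major cell order of the two nested `for` loops (identical in both Pythons)
def pvCells (h w : Int) : List (Int × Int) :=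
  (PySem.List.pyRange 0 h 1).flatMap (fun r => (PySem.List.pyRange 0 w 1).map (fun c => (r, c)))

-- fuel: strict upper bound on the number of `while` iterations (sufficiency proved in the lemmas)
def pvFuelA (grid : List (List Int)) : Nat := 2 * grid.length * (grid.headD []).length + 2

-- A's `bfs`: explicit stack (LIFO), marking visited on push; the visited matrix is represented as
-- the list of its True cells (exact: every read/write of it is at a guarded in-bounds cell)
def bfsA (grid : List (List Int)) (h w color : Int) :
    Nat → List (Int × Int) → List (Int × Int) → List (Int × Int) →
    (List (Int × Int) × List (Int × Int))
  | 0, _, vis, comp => (comp, vis)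
  | _ + 1, [], vis, comp => (comp, vis)
  | fuel + 1, x :: st, vis, comp =>
    let s2 := (pvNbrs x).foldl
      (fun (sv : List (Int × Int) × List (Int × Int)) y =>
        if pvInB h w y && !sv.2.contains y && (pvVal grid y == color)
        then (y :: sv.1, y :: sv.2) else sv) (st, vis)
    bfsA grid h w color fuel s2.1 s2.2 (x :: comp)

-- the component-collection scan: visited cells + dict color -> list of components
def scanA (grid : List (List Int)) (h w : Int) :
    List (Int × Int) → List (Int × Int) → PySem.Dict Int (List (List (Int × Int))) →
    (List (Int × Int) × PySem.Dict Int (List (List (Int × Int))))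
  | [], vis, d => (vis, d)
  | x :: rest, vis, d =>
    let color := pvVal grid x
    if color != 0 && !vis.contains x then
      let p := bfsA grid h w color (pvFuelA grid) [x] (x :: vis) []
      scanA grid h w rest p.2 (d.insert color ((d.getD color []) ++ [p.1]))
    else scanA grid h w rest vis d

-- max(comps, key=len): first maximal element
def pvMaxByLen (comps : List (List (Int × Int))) : List (Int × Int) :=
  match comps with
  | [] => []
  | c0 :: rest => rest.foldl (fun b x => if b.length < x.length then x else b) c0

-- adjacency check between two components (tuple-in-list membership, as in A)
def adjA (ca cb : List (Int × Int)) : Bool :=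
  ca.any (fun a => (pvNbrs a).any (fun y => cb.contains y))

-- inner `for j` loop over all colors
def findInnerA (ld : PySem.Dict Int (List (Int × Int))) (ca : Int) : List Int → Option Int
  | [] => none
  | cb :: rest =>
    if ca != cb && adjA (ld.getD ca []) (ld.getD cb []) then some cb
    else findInnerA ld ca rest

-- outer `for i` loop
def findPairA (ld : PySem.Dict Int (List (Int × Int))) (allColors : List Int) :
    List Int → Option (Int × Int)
  | [] => none
  | ca :: rest =>
    match findInnerA ld ca allColors with
    | some cb => some (ca, cb)
    | none => findPairA ld allColors rest

-- output[r][c] = v (every write of A is at an in-range cell; pySetD is exact there)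
def pvSet2 (g : List (List Int)) (x : Int × Int) (v : Int) : List (List Int) :=
  PySem.List.pySetD g x.1 (PySem.List.pySetD (PySem.List.pyGetD g x.1 []) x.2 v)

def transform (grid : List (List Int)) : List (List Int) :=
  let h := PySem.List.len grid
  let w := PySem.List.len (PySem.List.pyGetD grid 0 [])
  let sd := scanA grid h w (pvCells h w) [] PySem.Dict.empty
  let ld : PySem.Dict Int (List (Int × Int)) :=
    sd.2.items.foldl (fun acc p => acc.insert p.1 (pvMaxByLen p.2)) PySem.Dict.empty
  match findPairA ld ld.keys ld.keys with
  | none => grid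
  | some (src, tgt) =>
    let out1 := (ld.getD src []).foldl (fun g x => pvSet2 g x 0) grid
    (ld.getD tgt []).foldl (fun g x => pvSet2 g x src) out1

-- ===== PORT B =====
-- neighbour order of B's relaxation pass ((r-1,c),(r+1,c),(r,c-1),(r,c+1))
def pvNbrsUp (x : Int × Int) : List (Int × Int) :=
  [(x.1 - 1, x.2), (x.1 + 1, x.2), (x.1, x.2 - 1), (x.1, x.2 + 1)]

-- the row-major index r * w + c
def pvIdx (w : Int) (p : Int × Int) : Int := p.1 * w + p.2

-- the dict comprehension: nonzero cells (row-major) mapped to their row-major index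
def pvLabel0 (grid : List (List Int)) (h w : Int) : PySem.Dict (Int × Int) Int :=
  ((pvCells h w).filter (fun p => pvVal grid p != 0)).foldl
    (fun d p => d.insert p (pvIdx w p)) PySem.Dict.empty

-- one step of the inner `for q in …` min accumulation and the per-cell update
def pvPassStep (grid : List (List Int)) (st : PySem.Dict (Int × Int) Int × Bool)
    (p : Int × Int) : PySem.Dict (Int × Int) Int × Bool :=
  let d := st.1
  let l0 := d.getD p 0
  let l := (pvNbrsUp p).foldl
    (fun l q => if d.contains q && (pvVal grid q == pvVal grid p) && decide (d.getD q 0 < l)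
                then d.getD q 0 else l) l0
  if l < l0 then (d.insert p l, true) else st

-- one full `for … in label.items()` pass (keys are fixed; values are read live, as in Python)
def pvPass (grid : List (List Int)) (d : PySem.Dict (Int × Int) Int) :
    PySem.Dict (Int × Int) Int × Bool :=
  d.keys.foldl (pvPassStep grid) (d, false)

-- `while changed:` as fuel recursion (fuel sufficiency proved in the lemmas)
def pvRelax (grid : List (List Int)) : Nat → PySem.Dict (Int × Int) Int → PySem.Dict (Int × Int) Int
  | 0, d => d
  | fuel + 1, d =>
    let st := pvPass grid d
    if st.2 then pvRelax grid fuel st.1 else st.1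

def pvFuelB (grid : List (List Int)) : Nat :=
  grid.length * (grid.headD []).length * (grid.length * (grid.headD []).length) + 2

-- size[root] = size.get(root, 0) + 1 over label.values()
def pvSizes (lab : PySem.Dict (Int × Int) Int) : PySem.Dict Int Int :=
  lab.values.foldl (fun s v => s.insert v (s.getD v 0 + 1)) PySem.Dict.empty

-- rep: color -> root of its largest component (ties -> smallest root)
def pvRep (grid : List (List Int)) (lab : PySem.Dict (Int × Int) Int)
    (sz : PySem.Dict Int Int) : PySem.Dict Int Int :=
  lab.items.foldl (fun rep pr =>
    let col := pvVal grid pr.1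
    if !rep.contains col || decide (sz.getD (rep.getD col 0) 0 < sz.getD pr.2 0)
       || (sz.getD pr.2 0 == sz.getD (rep.getD col 0) 0 && decide (pr.2 < rep.getD col 0))
    then rep.insert col pr.2 else rep) PySem.Dict.empty

-- the adjacency generator inside `any(…)`
def pvAdjB (lab : PySem.Dict (Int × Int) Int) (ra rb : Int) : Bool :=
  lab.items.any (fun pr => pr.2 == ra && (pvNbrs pr.1).any (fun q => lab.get? q == some rb))

def transform_alt (grid : List (List Int)) : List (List Int) :=
  let h := PySem.List.len grid
  let w := PySem.List.len (PySem.List.pyGetD grid 0 [])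
  let lab := pvRelax grid (pvFuelB grid) (pvLabel0 grid h w)
  let sz := pvSizes lab
  let rep := pvRep grid lab sz
  let colors := rep.keys
  match (colors.flatMap (fun ca => colors.map (fun cb => (ca, cb)))).find?
      (fun pr => pr.1 != pr.2 && pvAdjB lab (rep.getD pr.1 0) (rep.getD pr.2 0)) with
  | none => grid
  | some (src, tgt) =>
    (PySem.List.enumerate grid).map (fun rrow =>
      (PySem.List.enumerate rrow.2).map (fun cv =>
        if lab.get? (rrow.1, cv.1) == some (rep.getD src 0) then 0
        else if lab.get? (rrow.1, cv.1) == some (rep.getD tgt 0) then src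
        else cv.2))

-- ===== PRECONDITION & SPEC =====
-- Exactly where the Python A returns: grid[0] must exist, and every row must have at least
-- len(grid[0]) entries (A indexes row[c] for every c < len(grid[0]); a shorter row raises IndexError).
def Pre_transform (grid : List (List Int)) : Prop :=
  grid ≠ [] ∧ ∀ row ∈ grid, (grid.headD []).length ≤ row.length
instance (grid : List (List Int)) : Decidable (Pre_transform grid) := by
  unfold Pre_transform; infer_instance

def pvWitness_transform : List (List Int) := [[1, 2], [0, 2]]

def Spec_transform (grid : List (List Int)) (out : List (List Int)) : Prop := out = transform_alt grid
instance (grid : List (List Int)) (out : List (List Int)) : Decidable (Spec_transform grid out) := by unfold Spec_transform; infer_instance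

-- ===== CLAIM (what is proved, stated in full; the proofs are below) =====
def Claim_equal_transform : Prop := ∀ (grid : List (List Int)), Dom_transform grid → Pre_transform grid → Spec_transform grid (transform grid)

-- ===== LEMMAS AND PROOFS =====

-- ---- basics about cells, neighbours, the unvisited counter ----

theorem mem_pvCells (h w : Int) (x : Int × Int) : x ∈ pvCells h w ↔ pvInB h w x = true := by
  obtain ⟨r, c⟩ := x
  simp only [pvCells, pvInB, List.mem_flatMap, List.mem_map, PySem.List.mem_pyRange_one,
    Bool.and_eq_true, decide_eq_true_eq, Prod.mk.injEq]
  constructor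
  · rintro ⟨a, ⟨ha1, ha2⟩, b, ⟨⟨hb1, hb2⟩, hq1, hq2⟩⟩; omega
  · rintro ⟨⟨⟨h1, h2⟩, h3⟩, h4⟩; exact ⟨r, ⟨h1, h2⟩, c, ⟨h3, h4⟩, rfl, rfl⟩

theorem nodup_pvCells (h w : Int) : (pvCells h w).Nodup := by
  have he : pvCells h w = (PySem.List.pyRange 0 h 1) ×ˢ (PySem.List.pyRange 0 w 1) := rfl
  rw [he]
  exact List.Nodup.product (PySem.List.nodup_pyRange_one _ _) (PySem.List.nodup_pyRange_one _ _)

theorem length_pvCells (h w : Int) : (pvCells h w).length = h.toNat * w.toNat := by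
  have he : pvCells h w = (PySem.List.pyRange 0 h 1) ×ˢ (PySem.List.pyRange 0 w 1) := rfl
  rw [he, List.length_product, PySem.List.length_pyRange_one, PySem.List.length_pyRange_one]
  simp

theorem nodup_pvNbrs (x : Int × Int) : (pvNbrs x).Nodup := by
  obtain ⟨r, c⟩ := x
  simp only [pvNbrs, List.nodup_cons, List.mem_cons, Prod.mk.injEq,
    List.not_mem_nil, or_false, List.nodup_nil, and_true, not_or]
  refine ⟨⟨?_,?_,?_⟩,⟨?_,?_⟩,?_⟩ <;> first | omega | (simp; omega)

-- contains on lists of cells is membership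
theorem contains_cell (l : List (Int × Int)) (x : Int × Int) : l.contains x = decide (x ∈ l) := by
  by_cases hx : x ∈ l
  · rw [decide_eq_true hx]; exact List.contains_iff_mem.mpr hx
  · rw [decide_eq_false hx]
    exact Bool.eq_false_iff.mpr (fun hc => hx (List.contains_iff_mem.mp hc))

-- number of in-grid cells not yet visited (proof-only helper)
def pvUcount (h w : Int) (vis : List (Int × Int)) : Nat :=
  ((pvCells h w).filter (fun z => !vis.contains z)).length

theorem pvUcount_congr (h w : Int) (vis vis' : List (Int × Int))
    (hv : ∀ z, z ∈ vis ↔ z ∈ vis') : pvUcount h w vis = pvUcount h w vis' := by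
  unfold pvUcount
  congr 1
  apply List.filter_congr
  intro z _
  simp [contains_cell, hv z]

theorem filter_cons_len (y : Int × Int) :
    ∀ (U : List (Int × Int)), U.Nodup → y ∈ U → ∀ (vis : List (Int × Int)), y ∉ vis →
    (U.filter (fun z => !(y :: vis).contains z)).length + 1
      = (U.filter (fun z => !vis.contains z)).length := by
  intro U
  induction U with
  | nil => intro _ hy; simp at hy
  | cons u U ih =>
    intro hnd hy vis hyv
    simp only [List.nodup_cons] at hnd
    by_cases hu : u = y
    · subst hu
      have h1 : (u :: U).filter (fun z => !(u :: vis).contains z)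
          = U.filter (fun z => !(u :: vis).contains z) := by
        simp [List.filter_cons, List.contains_iff_mem]
      have h2 : (u :: U).filter (fun z => !vis.contains z)
          = u :: U.filter (fun z => !vis.contains z) := by
        simp [List.filter_cons, contains_cell, hyv]
      rw [h1, h2]
      have h3 : U.filter (fun z => !(u :: vis).contains z)
          = U.filter (fun z => !vis.contains z) := by
        apply List.filter_congr
        intro z hz
        have : z ≠ u := fun he => hnd.1 (he ▸ hz)
        simp [contains_cell, this]
      rw [h3]; simp
    · have hyU : y ∈ U := by
        rcases List.mem_cons.mp hy with h | h
        · exact absurd h.symm hu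
        · exact h
      by_cases huv : u ∈ y :: vis
      · have huv' : u ∈ vis := by
          rcases List.mem_cons.mp huv with h | h
          · exact absurd h hu
          · exact h
        have h1 : (u :: U).filter (fun z => !(y :: vis).contains z)
            = U.filter (fun z => !(y :: vis).contains z) := by
          simp [List.filter_cons, contains_cell]; tauto
        have h2 : (u :: U).filter (fun z => !vis.contains z)
            = U.filter (fun z => !vis.contains z) := by
          simp [List.filter_cons, contains_cell]; tauto
        rw [h1, h2]; exact ih hnd.2 hyU vis hyv
      · have huv' : u ∉ vis := fun hc => huv (List.mem_cons_of_mem _ hc)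
        have h1 : (u :: U).filter (fun z => !(y :: vis).contains z)
            = u :: U.filter (fun z => !(y :: vis).contains z) := by
          simp [List.filter_cons, contains_cell]; tauto
        have h2 : (u :: U).filter (fun z => !vis.contains z)
            = u :: U.filter (fun z => !vis.contains z) := by
          simp [List.filter_cons, contains_cell]; tauto
        rw [h1, h2]
        simp only [List.length_cons]
        have := ih hnd.2 hyU vis hyv
        omega

theorem pvUcount_cons (h w : Int) (y : Int × Int) (vis : List (Int × Int))
    (hy : pvInB h w y = true) (hyv : y ∉ vis) :
    pvUcount h w (y :: vis) + 1 = pvUcount h w vis := by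
  unfold pvUcount
  exact filter_cons_len y (pvCells h w) (nodup_pvCells h w) ((mem_pvCells h w y).mpr hy) vis hyv

theorem pvUcount_le (h w : Int) (vis : List (Int × Int)) :
    pvUcount h w vis ≤ h.toNat * w.toNat := by
  have h1 := List.length_filter_le (fun z => !vis.contains z) (pvCells h w)
  have h2 := length_pvCells h w
  unfold pvUcount
  omega

-- ---- reachability through same-colored cells ----

inductive pvReach (grid : List (List Int)) (h w color : Int) (V : List (Int × Int)) (s : Int × Int) :
    (Int × Int) → Prop
  | base : pvReach grid h w color V s s
  | step {y x : Int × Int} : pvReach grid h w color V s y → x ∈ pvNbrs y →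
      pvInB h w x = true → pvVal grid x = color → x ∉ V → pvReach grid h w color V s x

theorem pvReach_prop (grid : List (List Int)) (h w color : Int) (V : List (Int × Int))
    (s z : Int × Int) (hs1 : pvInB h w s = true) (hs2 : pvVal grid s = color) (hs3 : s ∉ V) :
    pvReach grid h w color V s z → pvInB h w z = true ∧ pvVal grid z = color ∧ z ∉ V := by
  intro hr
  induction hr with
  | base => exact ⟨hs1, hs2, hs3⟩
  | step hr hn hb hv hnv ih => exact ⟨hb, hv, hnv⟩

-- ---- the neighbour-push fold of A's bfs ----

theorem bfsA_fold (grid : List (List Int)) (h w color : Int) :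
    ∀ (l : List (Int × Int)), l.Nodup → ∀ (st vis : List (Int × Int)),
    (l.foldl (fun (sv : List (Int × Int) × List (Int × Int)) y =>
        if pvInB h w y && !sv.2.contains y && (pvVal grid y == color)
        then (y :: sv.1, y :: sv.2) else sv) (st, vis))
      = ((l.filter (fun y => pvInB h w y && !vis.contains y && (pvVal grid y == color))).reverse ++ st,
         (l.filter (fun y => pvInB h w y && !vis.contains y && (pvVal grid y == color))).reverse ++ vis) := by
  intro l
  induction l with
  | nil => intro _ st vis; simp
  | cons a l ih =>
    intro hnd st vis
    simp only [List.nodup_cons] at hnd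
    have hfc : ∀ (vv : List (Int × Int)), (∀ z ∈ l, (vv.contains z = (a :: vv).contains z)) →
        l.filter (fun y => pvInB h w y && !vv.contains y && (pvVal grid y == color))
          = l.filter (fun y => pvInB h w y && !(a :: vv).contains y && (pvVal grid y == color)) := by
      intro vv hv
      apply List.filter_congr
      intro z hz; rw [hv z hz]
    by_cases hp : (pvInB h w a && !vis.contains a && (pvVal grid a == color)) = true
    · simp only [List.foldl_cons, List.filter_cons]
      rw [if_pos hp, if_pos hp]
      rw [ih hnd.2 (a :: st) (a :: vis)]
      have he := hfc vis (fun z hz => by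
        have hza : z ≠ a := fun hc => hnd.1 (hc ▸ hz)
        simp [contains_cell, hza])
      rw [← he]
      simp
    · simp only [List.foldl_cons, List.filter_cons]
      rw [if_neg hp, if_neg hp]
      exact ih hnd.2 st vis

-- ---- removing several fresh in-grid cells from the unvisited counter ----

theorem pvUcount_append (h w : Int) :
    ∀ (P : List (Int × Int)), P.Nodup → ∀ (vis : List (Int × Int)),
    (∀ y ∈ P, pvInB h w y = true ∧ y ∉ vis) →
    pvUcount h w (P.reverse ++ vis) + P.length = pvUcount h w vis := by
  intro P
  induction P with
  | nil => intro _ vis _; simp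
  | cons a P ih =>
    intro hnd vis hP
    simp only [List.nodup_cons] at hnd
    have h1 : pvUcount h w ((a :: P).reverse ++ vis) = pvUcount h w (P.reverse ++ (a :: vis)) := by
      apply pvUcount_congr
      intro z; simp [List.mem_append, List.mem_reverse, List.mem_cons]; try tauto
    have h2 := ih hnd.2 (a :: vis) (fun y hy => by
      have hya : y ≠ a := fun hc => hnd.1 (hc ▸ hy)
      have := hP y (List.mem_cons_of_mem _ hy)
      exact ⟨this.1, by simp [List.mem_cons, hya, this.2]⟩)
    have h3 := pvUcount_cons h w a vis (hP a List.mem_cons_self).1 (hP a List.mem_cons_self).2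
    simp only [List.length_cons]
    omega

-- ---- terminal state of a flood: the component is exactly what was collected ----

theorem flood_done (grid : List (List Int)) (h w color : Int) (V₀ : List (Int × Int))
    (s : Int × Int) (vis comp : List (Int × Int))
    (hvis : ∀ z, z ∈ vis ↔ z ∈ V₀ ∨ z ∈ comp)
    (hnd : comp.Nodup)
    (hV0 : ∀ z ∈ comp, z ∉ V₀)
    (hr : ∀ z ∈ comp, pvReach grid h w color V₀ s z)
    (hclosed : ∀ z ∈ comp, ∀ y ∈ pvNbrs z, pvInB h w y = true → pvVal grid y = color → y ∉ V₀ → y ∈ vis) :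
    (∀ z, z ∈ vis ↔ z ∈ V₀ ∨ z ∈ comp) ∧ comp.Nodup ∧
    (∀ z ∈ comp, pvReach grid h w color V₀ s z ∧ z ∉ V₀) ∧
    (∀ z ∈ comp, ∀ y ∈ pvNbrs z, pvInB h w y = true → pvVal grid y = color → y ∉ V₀ → y ∈ comp) := by
  refine ⟨hvis, hnd, fun z hz => ⟨hr z hz, hV0 z hz⟩, fun z hz y hy hb hv hnv => ?_⟩
  have := hclosed z hz y hy hb hv hnv
  rcases (hvis y).mp this with hc | hc
  · exact absurd hc hnv
  · exact hc

-- ---- A's bfs computes the reachable set (worklist invariant induction) ----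

theorem bfsA_spec (grid : List (List Int)) (h w color : Int) (V₀ : List (Int × Int)) (s : Int × Int) :
    ∀ (fuel : Nat) (st vis comp : List (Int × Int)),
    (∀ z, z ∈ vis ↔ z ∈ V₀ ∨ z ∈ comp ∨ z ∈ st) →
    (comp ++ st).Nodup →
    (∀ z ∈ comp ++ st, z ∉ V₀) →
    (∀ z ∈ comp ++ st, pvReach grid h w color V₀ s z) →
    (∀ z ∈ st, pvInB h w z = true) →
    (∀ z ∈ comp, ∀ y ∈ pvNbrs z, pvInB h w y = true → pvVal grid y = color → y ∉ V₀ → y ∈ vis) →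
    2 * pvUcount h w vis + st.length ≤ fuel →
    (∀ z, z ∈ (bfsA grid h w color fuel st vis comp).2 ↔
        z ∈ V₀ ∨ z ∈ (bfsA grid h w color fuel st vis comp).1) ∧
    (bfsA grid h w color fuel st vis comp).1.Nodup ∧
    (∀ z ∈ (bfsA grid h w color fuel st vis comp).1, pvReach grid h w color V₀ s z ∧ z ∉ V₀) ∧
    (∀ z ∈ (bfsA grid h w color fuel st vis comp).1, ∀ y ∈ pvNbrs z,
        pvInB h w y = true → pvVal grid y = color → y ∉ V₀ →
        y ∈ (bfsA grid h w color fuel st vis comp).1) ∧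
    (∀ z ∈ comp ++ st, z ∈ (bfsA grid h w color fuel st vis comp).1) := by
  intro fuel
  induction fuel with
  | zero =>
    intro st vis comp hvis hnd hV0 hr hgood hclosed hfuel
    have hst : st = [] := by
      have := List.length_eq_zero_iff.mp (by omega : st.length = 0)
      exact this
    subst hst
    simp only [bfsA, List.append_nil] at *
    have hd := flood_done grid h w color V₀ s vis comp
      (fun z => by rw [hvis z]; simp) hnd hV0 hr hclosed
    exact ⟨hd.1, hd.2.1, hd.2.2.1, hd.2.2.2, fun z hz => hz⟩
  | succ fuel ih =>
    intro st vis comp hvis hnd hV0 hr hgood hclosed hfuel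
    match st with
    | [] =>
      simp only [bfsA, List.append_nil] at *
      have hd := flood_done grid h w color V₀ s vis comp
        (fun z => by rw [hvis z]; simp) hnd hV0 hr hclosed
      exact ⟨hd.1, hd.2.1, hd.2.2.1, hd.2.2.2, fun z hz => hz⟩
    | x :: st' =>
      have hx_in : x ∈ comp ++ x :: st' := by simp
      have hx_vis : x ∈ vis := (hvis x).mpr (Or.inr (Or.inr List.mem_cons_self))
      set p : (Int × Int) → Bool :=
        fun y => pvInB h w y && !vis.contains y && (pvVal grid y == color) with hp
      set P : List (Int × Int) := (pvNbrs x).filter p with hPdef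
      have hPmem : ∀ y ∈ P, pvInB h w y = true ∧ y ∉ vis ∧ pvVal grid y = color := by
        intro y hy
        have := List.of_mem_filter hy
        simp only [hp, Bool.and_eq_true, Bool.not_eq_true', beq_iff_eq] at this
        refine ⟨this.1.1, ?_, this.2⟩
        intro hc
        rw [contains_cell, decide_eq_true hc] at this
        exact absurd this.1.2 (by simp)
      have hPnbr : ∀ y ∈ P, y ∈ pvNbrs x := fun y hy => List.mem_of_mem_filter hy
      have hPnd : P.Nodup := (nodup_pvNbrs x).filter p
      have hunf : bfsA grid h w color (fuel + 1) (x :: st') vis comp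
          = bfsA grid h w color fuel (P.reverse ++ st') (P.reverse ++ vis) (x :: comp) := by
        simp only [bfsA]
        rw [bfsA_fold grid h w color (pvNbrs x) (nodup_pvNbrs x) st' vis]
      rw [hunf]
      -- new invariants
      have hsub : ∀ z, z ∈ comp ∨ z = x ∨ z ∈ st' → z ∈ vis := by
        intro z hz
        apply (hvis z).mpr
        rcases hz with hz | hz | hz
        · exact Or.inr (Or.inl hz)
        · exact Or.inr (Or.inr (by simp [hz]))
        · exact Or.inr (Or.inr (by simp [hz]))
      have hvis' : ∀ z, z ∈ P.reverse ++ vis ↔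
          z ∈ V₀ ∨ z ∈ x :: comp ∨ z ∈ P.reverse ++ st' := by
        intro z
        simp only [List.mem_append, List.mem_reverse, List.mem_cons]
        constructor
        · rintro (hz | hz)
          · exact Or.inr (Or.inr (Or.inl hz))
          · rcases (hvis z).mp hz with h1 | h1 | h1
            · exact Or.inl h1
            · exact Or.inr (Or.inl (Or.inr h1))
            · rcases List.mem_cons.mp h1 with h2 | h2
              · exact Or.inr (Or.inl (Or.inl h2))
              · exact Or.inr (Or.inr (Or.inr h2))
        · rintro (hz | hz | hz)
          · exact Or.inr ((hvis z).mpr (Or.inl hz))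
          · rcases hz with h2 | h2
            · exact Or.inr (hsub z (Or.inr (Or.inl h2)))
            · exact Or.inr (hsub z (Or.inl h2))
          · rcases hz with h2 | h2
            · exact Or.inl h2
            · exact Or.inr (hsub z (Or.inr (Or.inr h2)))
      have hnd' : ((x :: comp) ++ (P.reverse ++ st')).Nodup := by
        have hperm : ((x :: comp) ++ (P.reverse ++ st')).Perm (P ++ (comp ++ x :: st')) := by
          rw [List.perm_iff_count]
          intro a
          simp only [List.count_append, List.count_cons, List.count_reverse]
          omega
        apply hperm.nodup_iff.mpr
        apply List.Nodup.append hPnd hnd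
        intro a haP hac
        have := (hPmem a haP).2.1
        exact this (hsub a (by
          rcases List.mem_append.mp hac with h1 | h1
          · exact Or.inl h1
          · rcases List.mem_cons.mp h1 with h2 | h2
            · exact Or.inr (Or.inl h2)
            · exact Or.inr (Or.inr h2)))
      have hV0' : ∀ z ∈ (x :: comp) ++ (P.reverse ++ st'), z ∉ V₀ := by
        intro z hz
        simp only [List.mem_append, List.mem_cons, List.mem_reverse] at hz
        rcases hz with (hz | hz) | hz | hz
        · exact hV0 x hx_in ∘ (hz ▸ id)
        · exact hV0 z (by simp [hz])
        · intro hc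
          exact (hPmem z hz).2.1 ((hvis z).mpr (Or.inl hc))
        · exact hV0 z (by simp [hz])
      have hreach_x : pvReach grid h w color V₀ s x := hr x hx_in
      have hr' : ∀ z ∈ (x :: comp) ++ (P.reverse ++ st'), pvReach grid h w color V₀ s z := by
        intro z hz
        simp only [List.mem_append, List.mem_cons, List.mem_reverse] at hz
        rcases hz with (hz | hz) | hz | hz
        · exact hz ▸ hreach_x
        · exact hr z (by simp [hz])
        · have hm := hPmem z hz
          have hnv : z ∉ V₀ := fun hc => hm.2.1 ((hvis z).mpr (Or.inl hc))
          exact pvReach.step hreach_x (hPnbr z hz) hm.1 hm.2.2 hnv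
        · exact hr z (by simp [hz])
      have hgood' : ∀ z ∈ P.reverse ++ st', pvInB h w z = true := by
        intro z hz
        rcases List.mem_append.mp hz with h1 | h1
        · exact (hPmem z (List.mem_reverse.mp h1)).1
        · exact hgood z (by simp [h1])
      have hclosed' : ∀ z ∈ x :: comp, ∀ y ∈ pvNbrs z,
          pvInB h w y = true → pvVal grid y = color → y ∉ V₀ → y ∈ P.reverse ++ vis := by
        intro z hz y hy hb hv hnv
        rcases List.mem_cons.mp hz with hz | hz
        · subst hz
          by_cases hyv : y ∈ vis
          · exact List.mem_append.mpr (Or.inr hyv)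
          · refine List.mem_append.mpr (Or.inl (List.mem_reverse.mpr ?_))
            rw [hPdef]
            apply List.mem_filter.mpr
            refine ⟨hy, ?_⟩
            simp only [hp, Bool.and_eq_true, Bool.not_eq_true', beq_iff_eq]
            exact ⟨⟨hb, by rw [contains_cell, decide_eq_false hyv]⟩, hv⟩
        · exact List.mem_append.mpr (Or.inr (hclosed z hz y hy hb hv hnv))
      have hfuel' : 2 * pvUcount h w (P.reverse ++ vis) + (P.reverse ++ st').length ≤ fuel := by
        have := pvUcount_append h w P hPnd vis (fun y hy => ⟨(hPmem y hy).1, (hPmem y hy).2.1⟩)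
        simp only [List.length_append, List.length_reverse, List.length_cons] at hfuel ⊢
        omega
      have := ih (P.reverse ++ st') (P.reverse ++ vis) (x :: comp)
        hvis' hnd' hV0' hr' hgood' hclosed' hfuel'
      refine ⟨this.1, this.2.1, this.2.2.1, this.2.2.2.1, ?_⟩
      intro z hz
      apply this.2.2.2.2
      simp only [List.mem_append, List.mem_cons] at hz ⊢
      rcases hz with hz | hz | hz
      · exact Or.inl (Or.inr hz)
      · exact Or.inl (Or.inl hz)
      · exact Or.inr (Or.inr hz)

-- ---- wrapper: one call of A's bfs from an unvisited good start cell ----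

theorem bfsA_run (grid : List (List Int)) (h w color : Int) (vis₀ : List (Int × Int))
    (x : Int × Int) (fuel : Nat)
    (hx1 : pvInB h w x = true) (hx2 : pvVal grid x = color) (hx3 : x ∉ vis₀)
    (hfuel : 2 * pvUcount h w (x :: vis₀) + 1 ≤ fuel) :
    (∀ z, z ∈ (bfsA grid h w color fuel [x] (x :: vis₀) []).1 ↔
        pvReach grid h w color vis₀ x z) ∧
    (bfsA grid h w color fuel [x] (x :: vis₀) []).1.Nodup ∧
    (∀ z, z ∈ (bfsA grid h w color fuel [x] (x :: vis₀) []).2 ↔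
        z ∈ vis₀ ∨ z ∈ (bfsA grid h w color fuel [x] (x :: vis₀) []).1) := by
  have hs := bfsA_spec grid h w color vis₀ x fuel [x] (x :: vis₀) []
    (fun z => by simp [List.mem_cons]; tauto)
    (by simp)
    (fun z hz => by simp at hz; exact hz ▸ hx3)
    (fun z hz => by simp at hz; exact hz ▸ pvReach.base)
    (fun z hz => by simp at hz; exact hz ▸ hx1)
    (fun z hz => by simp at hz)
    (by simpa using hfuel)
  refine ⟨fun z => ⟨fun hz => (hs.2.2.1 z hz).1, fun hz => ?_⟩, hs.2.1, hs.1⟩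
  · induction hz with
    | base => exact hs.2.2.2.2 x (by simp)
    | step hr hn hb hv hnv ih => exact hs.2.2.2.1 _ ih _ hn hb hv hnv

-- ---- reading and writing cells of the output grid ----

theorem bool_eq_of_iff {a b : Bool} (hab : a = true ↔ b = true) : a = b := by
  cases a <;> cases b <;> simp_all

def pvOk (g : List (List Int)) (x : Int × Int) : Prop :=
  0 ≤ x.1 ∧ x.1.toNat < g.length ∧ 0 ≤ x.2 ∧ x.2.toNat < (g.getD x.1.toNat []).length

theorem pyGetD_nonneg_getD (xs : List (List Int)) (i : Int) (hi : 0 ≤ i) :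
    PySem.List.pyGetD xs i [] = xs.getD i.toNat [] := by
  rw [show PySem.List.pyGetD xs i [] = (PySem.List.pyGet? xs i).getD [] from rfl,
    PySem.List.pyGet?_of_nonneg xs hi, List.getD_eq_getElem?_getD]

theorem pyGetD_nonneg_getD' (xs : List Int) (i : Int) (hi : 0 ≤ i) :
    PySem.List.pyGetD xs i 0 = xs.getD i.toNat 0 := by
  rw [show PySem.List.pyGetD xs i 0 = (PySem.List.pyGet? xs i).getD 0 from rfl,
    PySem.List.pyGet?_of_nonneg xs hi, List.getD_eq_getElem?_getD]

theorem pvVal_getD (grid : List (List Int)) (x : Int × Int) (h1 : 0 ≤ x.1) (h2 : 0 ≤ x.2) :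
    pvVal grid x = (grid.getD x.1.toNat []).getD x.2.toNat 0 := by
  unfold pvVal
  rw [pyGetD_nonneg_getD grid x.1 h1, pyGetD_nonneg_getD' _ x.2 h2]

theorem pvOk_of (grid : List (List Int)) (h w : Int) (hh : h.toNat = grid.length)
    (x : Int × Int) (hb : pvInB h w x = true) (hv : pvVal grid x ≠ 0) : pvOk grid x := by
  simp only [pvInB, Bool.and_eq_true, decide_eq_true_eq] at hb
  obtain ⟨⟨⟨hb1, hb2⟩, hb3⟩, hb4⟩ := hb
  have hr : x.1.toNat < grid.length := by omega
  refine ⟨hb1, hr, hb3, ?_⟩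
  by_contra hc
  rw [pvVal_getD grid x hb1 hb3, List.getD_eq_default] at hv
  · exact hv rfl
  · omega

theorem pvSet2_shape (g : List (List Int)) (x : Int × Int) (v : Int) (hx1 : 0 ≤ x.1) (hx2 : 0 ≤ x.2) :
    (pvSet2 g x v).length = g.length ∧
    (∀ r : Nat, ((pvSet2 g x v).getD r []).length = (g.getD r []).length) := by
  unfold pvSet2
  rw [PySem.List.pySetD_of_nonneg g _ hx1]
  refine ⟨by simp, fun r => ?_⟩
  by_cases hr : x.1.toNat = r
  · subst hr
    by_cases hlt : x.1.toNat < g.length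
    · rw [List.getD_eq_getElem _ _ (by simpa using hlt),
        List.getElem_set_self, List.getD_eq_getElem _ _ hlt]
      rw [PySem.List.pySetD_of_nonneg _ _ hx2, pyGetD_nonneg_getD g x.1 hx1,
        List.length_set, List.getD_eq_getElem _ _ hlt]
    · rw [List.getD_eq_default, List.getD_eq_default]
      · omega
      · simpa using hlt
  · by_cases hlt : r < g.length
    · rw [List.getD_eq_getElem _ _ (by simpa using hlt),
        List.getElem_set_ne (by omega) , List.getD_eq_getElem _ _ hlt]
    · rw [List.getD_eq_default, List.getD_eq_default]
      · omega
      · simpa using hlt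

theorem getD_set_self_list {α : Type} [Inhabited α] (l : List α) (i : Nat) (a d : α)
    (h : i < l.length) : (l.set i a).getD i d = a := by
  rw [List.getD_eq_getElem _ _ (by rw [List.length_set]; exact h)]
  exact List.getElem_set_self _

theorem getD_set_ne_list {α : Type} (l : List α) (i j : Nat) (a d : α) (hne : i ≠ j) :
    (l.set i a).getD j d = l.getD j d := by
  by_cases hlt : j < l.length
  · rw [List.getD_eq_getElem _ _ (by rw [List.length_set]; exact hlt),
      List.getElem_set_ne (by omega), List.getD_eq_getElem _ _ hlt]
  · rw [List.getD_eq_default _ _ (by rw [List.length_set]; omega),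
      List.getD_eq_default _ _ (by omega)]

theorem pvSet2_cell (g : List (List Int)) (x : Int × Int) (v : Int) (hx : pvOk g x)
    (r c : Nat) :
    ((pvSet2 g x v).getD r []).getD c 0
      = if x = ((r : Int), (c : Int)) then v else (g.getD r []).getD c 0 := by
  obtain ⟨h1, h2, h3, h4⟩ := hx
  unfold pvSet2
  rw [PySem.List.pySetD_of_nonneg g _ h1, PySem.List.pySetD_of_nonneg _ _ h3,
    pyGetD_nonneg_getD g x.1 h1]
  by_cases hr : x.1.toNat = r
  · subst hr
    rw [getD_set_self_list g x.1.toNat _ [] h2]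
    by_cases hc : x.2.toNat = c
    · subst hc
      have hcond : x = ((x.1.toNat : Int), (x.2.toNat : Int)) := by
        obtain ⟨a, b⟩ := x
        simp only [Prod.mk.injEq]
        simp only at h1 h3
        omega
      rw [if_pos hcond, getD_set_self_list _ x.2.toNat _ 0 h4]
    · have hcond : ¬ (x = ((x.1.toNat : Int), (c : Int))) := by
        obtain ⟨a, b⟩ := x
        simp only [Prod.mk.injEq, not_and]
        intro _
        simp only at h3 hc ⊢
        omega
      rw [if_neg hcond, getD_set_ne_list _ x.2.toNat c _ 0 hc]
  · have hcond : ¬ (x = ((r : Int), (c : Int))) := by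
      obtain ⟨a, b⟩ := x
      simp only [Prod.mk.injEq, not_and]
      intro ha
      exfalso
      simp only at h1 hr ha
      omega
    rw [if_neg hcond, getD_set_ne_list g x.1.toNat r _ [] hr]

theorem fold_set2 (v : Int) :
    ∀ (cs : List (Int × Int)) (g : List (List Int)), (∀ x ∈ cs, pvOk g x) →
    ((cs.foldl (fun g x => pvSet2 g x v) g).length = g.length) ∧
    (∀ r : Nat, ((cs.foldl (fun g x => pvSet2 g x v) g).getD r []).length = (g.getD r []).length) ∧
    (∀ r c : Nat, ((cs.foldl (fun g x => pvSet2 g x v) g).getD r []).getD c 0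
        = if ((r : Int), (c : Int)) ∈ cs then v else (g.getD r []).getD c 0) := by
  intro cs
  induction cs with
  | nil => intro g _; exact ⟨rfl, fun _ => rfl, fun r c => by simp⟩
  | cons x cs ihc =>
    intro g hok
    have hx := hok x List.mem_cons_self
    have hshape := pvSet2_shape g x v hx.1 hx.2.2.1
    have hok' : ∀ y ∈ cs, pvOk (pvSet2 g x v) y := by
      intro y hy
      obtain ⟨k1, k2, k3, k4⟩ := hok y (List.mem_cons_of_mem _ hy)
      exact ⟨k1, by rw [hshape.1]; exact k2, k3, by rw [hshape.2 y.1.toNat]; exact k4⟩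
    have ih := ihc (pvSet2 g x v) hok'
    simp only [List.foldl_cons]
    refine ⟨by rw [ih.1, hshape.1], fun r => by rw [ih.2.1 r, hshape.2 r], fun r c => ?_⟩
    rw [ih.2.2 r c]
    by_cases hin : ((r : Int), (c : Int)) ∈ cs
    · rw [if_pos hin, if_pos (List.mem_cons_of_mem _ hin)]
    · rw [if_neg hin, pvSet2_cell g x v hx r c]
      by_cases hxe : x = ((r : Int), (c : Int))
      · rw [if_pos hxe, if_pos (by rw [hxe] at *; exact List.mem_cons_self)]
      · rw [if_neg hxe, if_neg (by
          intro hc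
          rcases List.mem_cons.mp hc with h1 | h1
          · exact hxe h1.symm
          · exact hin h1)]

theorem grids_eq (g1 g2 : List (List Int)) (hl : g1.length = g2.length)
    (hr : ∀ r : Nat, (g1.getD r []).length = (g2.getD r []).length)
    (hc : ∀ r c : Nat, r < g1.length → c < (g1.getD r []).length →
      (g1.getD r []).getD c 0 = (g2.getD r []).getD c 0) : g1 = g2 := by
  apply List.ext_getElem hl
  intro r h1 h2
  apply List.ext_getElem
  · rw [← List.getD_eq_getElem g1 [] h1, ← List.getD_eq_getElem g2 [] h2]
    exact hr r
  · intro c hc1 hc2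
    have hbc : c < (g1.getD r []).length := by rw [List.getD_eq_getElem g1 [] h1]; exact hc1
    have := hc r c h1 hbc
    rw [List.getD_eq_getElem g1 [] h1, List.getD_eq_getElem g2 [] h2] at this
    rw [List.getD_eq_getElem _ 0 hc1, List.getD_eq_getElem _ 0 hc2] at this
    exact this

-- ---- where the pair search finds its pair ----

theorem findInnerA_some (ld : PySem.Dict Int (List (Int × Int))) (ca : Int) :
    ∀ (K : List Int) (cb : Int), findInnerA ld ca K = some cb →
    cb ∈ K ∧ (ca != cb && adjA (ld.getD ca []) (ld.getD cb [])) = true := by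
  intro K
  induction K with
  | nil => intro cb hcb; exact absurd hcb (by simp [findInnerA])
  | cons k K ihK =>
    intro cb hcb
    simp only [findInnerA] at hcb
    by_cases hp : (ca != k && adjA (ld.getD ca []) (ld.getD k [])) = true
    · rw [if_pos hp] at hcb
      injection hcb with hcb
      subst hcb
      exact ⟨List.mem_cons_self, hp⟩
    · rw [if_neg hp] at hcb
      obtain ⟨hm, hp'⟩ := ihK cb hcb
      exact ⟨List.mem_cons_of_mem _ hm, hp'⟩

theorem findPairA_some (ld : PySem.Dict Int (List (Int × Int))) (K : List Int) :
    ∀ (Krest : List Int) (a b : Int), findPairA ld K Krest = some (a, b) →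
    a ∈ Krest ∧ findInnerA ld a K = some b := by
  intro Krest
  induction Krest with
  | nil => intro a b hab; exact absurd hab (by simp [findPairA])
  | cons k Krest ihK =>
    intro a b hab
    simp only [findPairA] at hab
    cases hf : findInnerA ld k K with
    | some cb =>
      rw [hf] at hab
      injection hab with hab
      obtain ⟨rfl, rfl⟩ : k = a ∧ cb = b := by
        constructor <;> [exact congrArg Prod.fst hab; exact congrArg Prod.snd hab]
      exact ⟨List.mem_cons_self, hf⟩
    | none =>
      rw [hf] at hab
      obtain ⟨hm, hi⟩ := ihK a b hab
      exact ⟨List.mem_cons_of_mem _ hm, hi⟩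

-- ---- A's second pass (largest per color) as a dict ----

theorem ld_facts (d : PySem.Dict Int (List (List (Int × Int)))) (hknd : d.keys.Nodup) :
    (d.items.foldl (fun acc p => acc.insert p.1 (pvMaxByLen p.2)) PySem.Dict.empty).keys = d.keys ∧
    (∀ k CA, d.get? k = some CA →
      (d.items.foldl (fun acc p => acc.insert p.1 (pvMaxByLen p.2)) PySem.Dict.empty).get? k
        = some (pvMaxByLen CA)) := by
  have hkeys_eq : d.keys = d.items.map (fun p => p.1) := rfl
  have hmapnd : (d.items.map (fun p => p.1)).Nodup := by rw [← hkeys_eq]; exact hknd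
  have hitems := PySem.Dict.items_foldl_insert_fresh d.items (fun p => p.1)
    (fun p => pvMaxByLen p.2) PySem.Dict.empty
    (fun a _ => PySem.Dict.contains_empty a.1) hmapnd
  have hldkeys : (d.items.foldl (fun acc p => acc.insert p.1 (pvMaxByLen p.2)) PySem.Dict.empty).keys
      = d.keys := by
    show (d.items.foldl (fun acc p => acc.insert p.1 (pvMaxByLen p.2)) PySem.Dict.empty).items.map
        (fun p => p.1) = d.keys
    rw [hitems, hkeys_eq]
    simp [List.map_map]
    rfl
  refine ⟨hldkeys, fun k CA hCA => ?_⟩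
  apply PySem.Dict.get?_of_mem_items
  · rw [hitems]
    simp only [List.mem_append]
    right
    exact List.mem_map.mpr ⟨(k, CA), PySem.Dict.mem_items_of_get?_eq_some d hCA, rfl⟩
  · rw [hldkeys]; exact hknd

theorem pyGetD_zero_headD (grid : List (List Int)) :
    PySem.List.pyGetD grid 0 [] = grid.headD [] := by
  cases grid <;> simp [pysem]

-- ---- row-major indices, neighbour symmetry, reach algebra ----

theorem pvInB_iff (h w : Int) (p : Int × Int) :
    pvInB h w p = true ↔ 0 ≤ p.1 ∧ p.1 < h ∧ 0 ≤ p.2 ∧ p.2 < w := by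
  simp [pvInB, and_assoc]

theorem pvIdx_nonneg (h w : Int) (p : Int × Int) (hb : pvInB h w p = true) : 0 ≤ pvIdx w p := by
  rw [pvInB_iff] at hb
  have h1 : 0 ≤ p.1 * w := mul_nonneg hb.1 (by linarith [hb.2.2.1, hb.2.2.2])
  unfold pvIdx; linarith [hb.2.2.1]

theorem pvIdx_lt (h w : Int) (p : Int × Int) (hb : pvInB h w p = true) : pvIdx w p < h * w := by
  rw [pvInB_iff] at hb
  have h1 : (p.1 + 1) * w ≤ h * w :=
    mul_le_mul_of_nonneg_right (by linarith [hb.2.1]) (by linarith [hb.2.2.1, hb.2.2.2])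
  unfold pvIdx; nlinarith [hb.2.2.2]

theorem pvIdx_inj (h w : Int) (p q : Int × Int) (hbp : pvInB h w p = true)
    (hbq : pvInB h w q = true) (he : pvIdx w p = pvIdx w q) : p = q := by
  rw [pvInB_iff] at hbp hbq
  unfold pvIdx at he
  have h1 : p.1 = q.1 := by
    by_contra hne
    rcases lt_or_gt_of_ne hne with hlt | hlt
    · have : (p.1 + 1) * w ≤ q.1 * w :=
        mul_le_mul_of_nonneg_right (by omega) (by linarith [hbp.2.2.1, hbp.2.2.2])
      nlinarith [hbp.2.2.2, hbq.2.2.1]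
    · have : (q.1 + 1) * w ≤ p.1 * w :=
        mul_le_mul_of_nonneg_right (by omega) (by linarith [hbp.2.2.1, hbp.2.2.2])
      nlinarith [hbq.2.2.2, hbp.2.2.1]
  have h2 : p.2 = q.2 := by rw [h1] at he; linarith
  exact Prod.ext h1 h2

theorem mem_pvNbrs_symm (x y : Int × Int) : x ∈ pvNbrs y ↔ y ∈ pvNbrs x := by
  obtain ⟨a, b⟩ := x; obtain ⟨c, d⟩ := y
  simp only [pvNbrs, List.mem_cons, List.not_mem_nil, or_false, Prod.mk.injEq]
  omega

theorem mem_pvNbrsUp (z y : Int × Int) : z ∈ pvNbrsUp y ↔ z ∈ pvNbrs y := by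
  obtain ⟨a, b⟩ := z; obtain ⟨c, d⟩ := y
  simp only [pvNbrs, pvNbrsUp, List.mem_cons, List.not_mem_nil, or_false, Prod.mk.injEq]
  omega

theorem reach_trans (grid : List (List Int)) (h w c : Int) (a b u : Int × Int)
    (h1 : pvReach grid h w c [] a b) (h2 : pvReach grid h w c [] b u) :
    pvReach grid h w c [] a u := by
  induction h2 with
  | base => exact h1
  | step hr hn hb hv _ ih => exact pvReach.step ih hn hb hv (by simp)

theorem reach_symm (grid : List (List Int)) (h w c : Int) (s z : Int × Int)
    (hs1 : pvInB h w s = true) (hs2 : pvVal grid s = c)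
    (hr : pvReach grid h w c [] s z) : pvReach grid h w c [] z s := by
  induction hr with
  | base => exact pvReach.base
  | @step y x hry hn hb hv _ ih =>
    have hy := pvReach_prop grid h w c [] s y hs1 hs2 (by simp) hry
    have hxy : pvReach grid h w c [] x y :=
      pvReach.step pvReach.base ((mem_pvNbrs_symm y x).mpr hn) hy.1 hy.2.1 (by simp)
    exact reach_trans grid h w c x y s hxy ih

-- every cell has a unique reach-minimal cell ("root") in its component
theorem reach_exists_min_aux (grid : List (List Int)) (h w c : Int) :
    ∀ (n : Nat) (s : Int × Int), pvInB h w s = true → pvVal grid s = c →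
    (pvIdx w s).toNat ≤ n →
    ∃ m, pvReach grid h w c [] s m ∧ ∀ z, pvReach grid h w c [] s z → pvIdx w m ≤ pvIdx w z := by
  intro n
  induction n with
  | zero =>
    intro s hs1 hs2 hn
    by_cases hmin : ∀ z, pvReach grid h w c [] s z → pvIdx w s ≤ pvIdx w z
    · exact ⟨s, pvReach.base, hmin⟩
    · exfalso
      push_neg at hmin
      obtain ⟨z, hz, hlt⟩ := hmin
      have hzp := pvReach_prop grid h w c [] s z hs1 hs2 (by simp) hz
      have h1 := pvIdx_nonneg h w z hzp.1
      have h2 := pvIdx_nonneg h w s hs1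
      omega
  | succ n ih =>
    intro s hs1 hs2 hn
    by_cases hmin : ∀ z, pvReach grid h w c [] s z → pvIdx w s ≤ pvIdx w z
    · exact ⟨s, pvReach.base, hmin⟩
    · push_neg at hmin
      obtain ⟨z, hz, hlt⟩ := hmin
      have hzp := pvReach_prop grid h w c [] s z hs1 hs2 (by simp) hz
      have h1 := pvIdx_nonneg h w z hzp.1
      obtain ⟨m, hm1, hm2⟩ := ih z hzp.1 hzp.2.1 (by omega)
      refine ⟨m, reach_trans grid h w c s z m hz hm1, fun y hy => hm2 y ?_⟩
      exact reach_trans grid h w c z s y (reach_symm grid h w c s z hs1 hs2 hz) hy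

theorem reach_exists_min (grid : List (List Int)) (h w c : Int) (s : Int × Int)
    (hs1 : pvInB h w s = true) (hs2 : pvVal grid s = c) :
    ∃ m, pvReach grid h w c [] s m ∧ ∀ z, pvReach grid h w c [] s z → pvIdx w m ≤ pvIdx w z :=
  reach_exists_min_aux grid h w c (pvIdx w s).toNat s hs1 hs2 le_rfl

theorem reach_min_unique (grid : List (List Int)) (h w c : Int) (s m m' : Int × Int)
    (hs1 : pvInB h w s = true) (hs2 : pvVal grid s = c)
    (h1 : pvReach grid h w c [] s m) (h1m : ∀ z, pvReach grid h w c [] s z → pvIdx w m ≤ pvIdx w z)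
    (h2 : pvReach grid h w c [] s m') (h2m : ∀ z, pvReach grid h w c [] s z → pvIdx w m' ≤ pvIdx w z) :
    m = m' := by
  have hmb := (pvReach_prop grid h w c [] s m hs1 hs2 (by simp) h1).1
  have hmb' := (pvReach_prop grid h w c [] s m' hs1 hs2 (by simp) h2).1
  exact pvIdx_inj h w m m' hmb hmb' (le_antisymm (h1m m' h2) (h2m m h1))

-- pvCells is strictly sorted by row-major index
theorem pairwise_pvCells (h w : Int) :
    (pvCells h w).Pairwise (fun a b => pvIdx w a < pvIdx w b) := by
  by_cases hw : 0 ≤ w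
  · have hrow : ∀ r : Int, ((PySem.List.pyRange 0 w).map (fun c => (r, c))).Pairwise
        (fun a b => pvIdx w a < pvIdx w b) := by
      intro r
      have hcp : (PySem.List.pyRange 0 w).Pairwise (· < ·) := by
        rw [← Int.toNat_of_nonneg hw, PySem.List.pyRange_zero_natCast]
        exact List.Pairwise.map _ (fun a b hab => by exact_mod_cast hab) List.pairwise_lt_range
      exact List.Pairwise.map _
        (fun a b hab => by show r * w + a < r * w + b; linarith) hcp
    have hmain : ∀ rs : List Int, rs.Pairwise (· < ·) →
        (rs.flatMap (fun r => (PySem.List.pyRange 0 w).map (fun c => (r, c)))).Pairwise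
          (fun a b => pvIdx w a < pvIdx w b) := by
      intro rs
      induction rs with
      | nil => intro _; simp
      | cons r rs ih =>
        intro hp
        rw [List.pairwise_cons] at hp
        rw [List.flatMap_cons, List.pairwise_append]
        refine ⟨hrow r, ih hp.2, ?_⟩
        intro a ha b hb
        simp only [List.mem_map] at ha
        obtain ⟨ca, hca, rfl⟩ := ha
        simp only [List.mem_flatMap, List.mem_map] at hb
        obtain ⟨r', hr', cb, hcb, rfl⟩ := hb
        have hlt := hp.1 r' hr'
        rw [PySem.List.mem_pyRange_one] at hca hcb
        show pvIdx w (r, ca) < pvIdx w (r', cb)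
        unfold pvIdx
        simp only
        have : (r + 1) * w ≤ r' * w := mul_le_mul_of_nonneg_right (by omega) hw
        nlinarith
    show ((PySem.List.pyRange 0 h).flatMap
        (fun r => (PySem.List.pyRange 0 w).map (fun c => (r, c)))).Pairwise
      (fun a b => pvIdx w a < pvIdx w b)
    apply hmain
    by_cases hh : 0 ≤ h
    · rw [← Int.toNat_of_nonneg hh, PySem.List.pyRange_zero_natCast]
      exact List.Pairwise.map _ (fun a b hab => by exact_mod_cast hab) List.pairwise_lt_range
    · rw [PySem.List.pyRange_one_eq_nil (by omega)]
      exact List.Pairwise.nil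
  · have hnil : pvCells h w = [] := by
      rw [List.eq_nil_iff_forall_not_mem]
      intro x hx
      rw [mem_pvCells, pvInB_iff] at hx
      omega
    rw [hnil]
    exact List.Pairwise.nil

-- ---- B side: the good cells and the label-dict invariant ----

def pvGoods (grid : List (List Int)) (h w : Int) : List (Int × Int) :=
  (pvCells h w).filter (fun p => pvVal grid p != 0)

theorem mem_pvGoods (grid : List (List Int)) (h w : Int) (p : Int × Int) :
    p ∈ pvGoods grid h w ↔ pvInB h w p = true ∧ pvVal grid p ≠ 0 := by
  unfold pvGoods
  rw [List.mem_filter, mem_pvCells]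
  simp

theorem nodup_pvGoods (grid : List (List Int)) (h w : Int) : (pvGoods grid h w).Nodup :=
  (nodup_pvCells h w).filter _

def pvJ (grid : List (List Int)) (h w : Int) (d : PySem.Dict (Int × Int) Int) : Prop :=
  d.keys = pvGoods grid h w ∧
  ∀ p ∈ pvGoods grid h w, ∃ q, pvReach grid h w (pvVal grid p) [] p q ∧
    d.get? p = some (pvIdx w q) ∧ pvIdx w q ≤ pvIdx w p

theorem pvJ_getD (grid : List (List Int)) (h w : Int) (d : PySem.Dict (Int × Int) Int)
    (hJ : pvJ grid h w d) (p : Int × Int) (hp : p ∈ pvGoods grid h w) :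
    ∃ q, pvReach grid h w (pvVal grid p) [] p q ∧ d.getD p 0 = pvIdx w q ∧
      0 ≤ d.getD p 0 ∧ d.getD p 0 ≤ pvIdx w p := by
  obtain ⟨q, hq1, hq2, hq3⟩ := hJ.2 p hp
  have hgd : d.getD p 0 = pvIdx w q := PySem.Dict.getD_of_get?_eq_some _ _ hq2
  have hpb := (mem_pvGoods grid h w p).mp hp
  have hqb := (pvReach_prop grid h w (pvVal grid p) [] p q hpb.1 rfl (by simp) hq1).1
  exact ⟨q, hq1, hgd, by rw [hgd]; exact pvIdx_nonneg h w q hqb, by rw [hgd]; exact hq3⟩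

-- initial dict facts
theorem label0_items (grid : List (List Int)) (h w : Int) :
    (pvLabel0 grid h w).items = (pvGoods grid h w).map (fun p => (p, pvIdx w p)) := by
  unfold pvLabel0
  have := PySem.Dict.items_foldl_insert_fresh (pvGoods grid h w) (fun a => a)
    (fun a => pvIdx w a) PySem.Dict.empty
    (fun a _ => PySem.Dict.contains_empty a)
    (by simpa using nodup_pvGoods grid h w)
  simpa using this

theorem label0_keys (grid : List (List Int)) (h w : Int) :
    (pvLabel0 grid h w).keys = pvGoods grid h w := by
  show (pvLabel0 grid h w).items.map (fun p => p.1) = pvGoods grid h w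
  rw [label0_items]
  simp [Function.comp_def]

theorem label0_J (grid : List (List Int)) (h w : Int) : pvJ grid h w (pvLabel0 grid h w) := by
  refine ⟨label0_keys grid h w, fun p hp => ⟨p, pvReach.base, ?_, le_rfl⟩⟩
  apply PySem.Dict.get?_of_mem_items
  · rw [label0_items]
    exact List.mem_map.mpr ⟨p, hp, rfl⟩
  · rw [label0_keys]; exact nodup_pvGoods grid h w

-- ---- the inner min-selection fold of a pass ----

theorem pvMinFold_spec (P : (Int × Int) → Bool) (g : (Int × Int) → Int) :
    ∀ (l : List (Int × Int)) (a0 : Int),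
    (l.foldl (fun a q => if P q && decide (g q < a) then g q else a) a0 = a0 ∨
     ∃ q ∈ l, P q = true ∧
       l.foldl (fun a q => if P q && decide (g q < a) then g q else a) a0 = g q) ∧
    l.foldl (fun a q => if P q && decide (g q < a) then g q else a) a0 ≤ a0 ∧
    (∀ q ∈ l, P q = true →
      l.foldl (fun a q => if P q && decide (g q < a) then g q else a) a0 ≤ g q) := by
  intro l
  induction l with
  | nil => intro a0; exact ⟨Or.inl rfl, le_rfl, by simp⟩
  | cons x l ih =>
    intro a0
    simp only [List.foldl_cons]
    set a1 := if P x && decide (g x < a0) then g x else a0 with ha1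
    have ha1le : a1 ≤ a0 := by
      rw [ha1]; split_ifs with hc
      · simp only [Bool.and_eq_true, decide_eq_true_eq] at hc; omega
      · exact le_rfl
    have spec := ih a1
    refine ⟨?_, le_trans spec.2.1 ha1le, ?_⟩
    · rcases spec.1 with hs | ⟨q, hq, hPq, hfq⟩
      · by_cases hc : (P x && decide (g x < a0)) = true
        · have hcc := hc
          simp only [Bool.and_eq_true] at hcc
          exact Or.inr ⟨x, List.mem_cons_self, hcc.1, hs.trans (by rw [ha1, if_pos hc])⟩
        · exact Or.inl (hs.trans (by rw [ha1, if_neg hc]))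
      · exact Or.inr ⟨q, List.mem_cons_of_mem _ hq, hPq, hfq⟩
    · intro q hq hPq
      rcases List.mem_cons.mp hq with rfl | hq'
      · refine le_trans spec.2.1 ?_
        rw [ha1]
        by_cases hlt : g q < a0
        · rw [if_pos (by simp [hPq, hlt])]
        · split_ifs with hc
          · exact le_rfl
          · omega
      · exact spec.2.2 q hq' hPq

-- one pass step either keeps the state (and p is locally relaxed) or strictly lowers label p
def pvLocalFix (grid : List (List Int)) (d : PySem.Dict (Int × Int) Int) (p : Int × Int) : Prop :=
  ∀ q ∈ pvNbrsUp p, d.contains q = true → pvVal grid q = pvVal grid p →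
    d.getD p 0 ≤ d.getD q 0

theorem passStep_analysis (grid : List (List Int)) (st : PySem.Dict (Int × Int) Int × Bool)
    (p : Int × Int) :
    (pvPassStep grid st p = st ∧ pvLocalFix grid st.1 p) ∨
    (∃ q ∈ pvNbrsUp p, st.1.contains q = true ∧ pvVal grid q = pvVal grid p ∧
       st.1.getD q 0 < st.1.getD p 0 ∧
       pvPassStep grid st p = (st.1.insert p (st.1.getD q 0), true)) := by
  have hspec := pvMinFold_spec
    (fun q => st.1.contains q && (pvVal grid q == pvVal grid p))
    (fun q => st.1.getD q 0) (pvNbrsUp p) (st.1.getD p 0)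
  set l := (pvNbrsUp p).foldl
    (fun a q => if (st.1.contains q && (pvVal grid q == pvVal grid p)) && decide (st.1.getD q 0 < a)
                then st.1.getD q 0 else a) (st.1.getD p 0) with hl
  have hunf : pvPassStep grid st p = if l < st.1.getD p 0 then (st.1.insert p l, true) else st := by
    rfl
  by_cases hlt : l < st.1.getD p 0
  · right
    rcases hspec.1 with hs | ⟨q, hq, hPq, hfq⟩
    · rw [hs] at hlt; omega
    · simp only [Bool.and_eq_true, beq_iff_eq] at hPq
      refine ⟨q, hq, hPq.1, hPq.2, by omega, ?_⟩
      rw [hunf, if_pos hlt, hfq]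
  · left
    have hle := hspec.2.1
    have heq : l = st.1.getD p 0 := by omega
    refine ⟨by rw [hunf, if_neg hlt], fun q hq hc hv => ?_⟩
    have hq3 := hspec.2.2 q hq (by simp [hc, hv])
    rw [heq] at hq3
    exact hq3

-- ---- the measure and the pass invariant ----

def pvSB (grid : List (List Int)) (h w : Int) (d : PySem.Dict (Int × Int) Int) : Nat :=
  ((pvGoods grid h w).map (fun p => (d.getD p 0).toNat)).sum

theorem sum_map_lt {α : Type} (f g : α → Nat) :
    ∀ (l : List α) (p : α), p ∈ l → (∀ x ∈ l, f x ≤ g x) → f p < g p →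
    (l.map f).sum < (l.map g).sum := by
  intro l
  induction l with
  | nil => intro p hp; simp at hp
  | cons x l ih =>
    intro p hp hle hlt
    simp only [List.map_cons, List.sum_cons]
    rcases List.mem_cons.mp hp with rfl | hp'
    · have : (l.map f).sum ≤ (l.map g).sum :=
        List.sum_le_sum (fun i hi => hle i (List.mem_cons_of_mem _ hi))
      omega
    · have h1 := hle x List.mem_cons_self
      have h2 := ih p hp' (fun y hy => hle y (List.mem_cons_of_mem _ hy)) hlt
      omega

theorem pass_inv_step (grid : List (List Int)) (h w : Int)
    (d0 : PySem.Dict (Int × Int) Int) (hJ0 : pvJ grid h w d0)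
    (p : Int × Int) (hp : p ∈ pvGoods grid h w)
    (st : PySem.Dict (Int × Int) Int × Bool)
    (hJ : pvJ grid h w st.1)
    (hle : ∀ x ∈ pvGoods grid h w, st.1.getD x 0 ≤ d0.getD x 0)
    (hfalse : st.2 = false → st.1 = d0)
    (htrue : st.2 = true → pvSB grid h w st.1 < pvSB grid h w d0) :
    pvJ grid h w (pvPassStep grid st p).1 ∧
    (∀ x ∈ pvGoods grid h w, (pvPassStep grid st p).1.getD x 0 ≤ d0.getD x 0) ∧
    ((pvPassStep grid st p).2 = false → st.2 = false ∧ pvLocalFix grid st.1 p) ∧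
    ((pvPassStep grid st p).2 = true → pvSB grid h w (pvPassStep grid st p).1 < pvSB grid h w d0) := by
  rcases passStep_analysis grid st p with ⟨heq, hlf⟩ | ⟨q, hq, hc, hv, hlt, heq⟩
  · rw [heq]
    exact ⟨hJ, hle, fun hf => ⟨hf, hlf⟩, htrue⟩
  · rw [heq]
    simp only
    have hqg : q ∈ pvGoods grid h w := by
      rw [← hJ.1]
      exact (PySem.Dict.contains_iff_mem_keys st.1 q).mp hc
    obtain ⟨u, hu1, hu2, hu3, hu4⟩ := pvJ_getD grid h w st.1 hJ q hqg
    obtain ⟨qp, hqp1, hqp2, hqp3, hqp4⟩ := pvJ_getD grid h w st.1 hJ p hp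
    have hpb := (mem_pvGoods grid h w p).mp hp
    have hqb := (mem_pvGoods grid h w q).mp hqg
    have hpc : st.1.contains p = true := by
      rw [PySem.Dict.contains_iff_mem_keys, hJ.1]; exact hp
    -- the new witness for p
    have hRpq : pvReach grid h w (pvVal grid p) [] p q :=
      pvReach.step pvReach.base ((mem_pvNbrsUp q p).mp hq) hqb.1 hv (by simp)
    have hRpu : pvReach grid h w (pvVal grid p) [] p u :=
      reach_trans grid h w (pvVal grid p) p q u hRpq (hv ▸ hu1)
    have hkeys' : (st.1.insert p (st.1.getD q 0)).keys = pvGoods grid h w := by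
      rw [PySem.Dict.keys_insert_of_contains _ _ hpc]; exact hJ.1
    have hJ' : pvJ grid h w (st.1.insert p (st.1.getD q 0)) := by
      refine ⟨hkeys', fun x hx => ?_⟩
      by_cases hxp : x = p
      · subst hxp
        refine ⟨u, hRpu, ?_, by omega⟩
        rw [PySem.Dict.get?_insert_self, hu2]
      · obtain ⟨y, hy1, hy2, hy3⟩ := hJ.2 x hx
        exact ⟨y, hy1, by rw [PySem.Dict.get?_insert_of_ne _ _ hxp]; exact hy2, hy3⟩
    have hgd' : ∀ x, (st.1.insert p (st.1.getD q 0)).getD x 0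
        = if x = p then st.1.getD q 0 else st.1.getD x 0 := by
      intro x
      rw [PySem.Dict.getD_insert]
    have hle' : ∀ x ∈ pvGoods grid h w,
        (st.1.insert p (st.1.getD q 0)).getD x 0 ≤ d0.getD x 0 := by
      intro x hx
      rw [hgd' x]
      by_cases hxp : x = p
      · subst hxp
        rw [if_pos rfl]
        have := hle x hx
        omega
      · rw [if_neg hxp]; exact hle x hx
    refine ⟨hJ', hle', by simp, fun _ => ?_⟩
    -- strict decrease of the measure against d0
    obtain ⟨u0, _, hu02, hu03, _⟩ := pvJ_getD grid h w d0 hJ0 p hp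
    apply sum_map_lt _ _ (pvGoods grid h w) p hp
    · intro x hx
      have := hle' x hx
      have h0 : 0 ≤ (st.1.insert p (st.1.getD q 0)).getD x 0 := by
        obtain ⟨y, _, hy2, hy3, _⟩ := pvJ_getD grid h w _ hJ' x hx
        omega
      omega
    · have hlep := hle p hp
      rw [hgd' p, if_pos rfl]
      omega

theorem pass_fold (grid : List (List Int)) (h w : Int)
    (d0 : PySem.Dict (Int × Int) Int) (hJ0 : pvJ grid h w d0) :
    ∀ (ks : List (Int × Int)), (∀ p ∈ ks, p ∈ pvGoods grid h w) →
    ∀ (st : PySem.Dict (Int × Int) Int × Bool),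
    pvJ grid h w st.1 →
    (∀ x ∈ pvGoods grid h w, st.1.getD x 0 ≤ d0.getD x 0) →
    (st.2 = false → st.1 = d0) →
    (st.2 = true → pvSB grid h w st.1 < pvSB grid h w d0) →
    pvJ grid h w (ks.foldl (pvPassStep grid) st).1 ∧
    (∀ x ∈ pvGoods grid h w, (ks.foldl (pvPassStep grid) st).1.getD x 0 ≤ d0.getD x 0) ∧
    ((ks.foldl (pvPassStep grid) st).2 = false →
      (ks.foldl (pvPassStep grid) st).1 = d0 ∧ st.2 = false ∧ ∀ p ∈ ks, pvLocalFix grid d0 p) ∧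
    ((ks.foldl (pvPassStep grid) st).2 = true →
      pvSB grid h w (ks.foldl (pvPassStep grid) st).1 < pvSB grid h w d0) := by
  intro ks
  induction ks with
  | nil =>
    intro _ st hJ hle hfalse htrue
    exact ⟨hJ, hle, fun hf => ⟨hfalse hf, hf, by simp⟩, htrue⟩
  | cons x ks ih =>
    intro hks st hJ hle hfalse htrue
    have hx := hks x List.mem_cons_self
    obtain ⟨hJ', hle', hfalse', htrue'⟩ :=
      pass_inv_step grid h w d0 hJ0 x hx st hJ hle hfalse htrue
    simp only [List.foldl_cons]
    have hfalse'' : (pvPassStep grid st x).2 = false → (pvPassStep grid st x).1 = d0 := by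
      intro hf
      obtain ⟨hf1, _⟩ := hfalse' hf
      rcases passStep_analysis grid st x with ⟨heq, _⟩ | ⟨q, _, _, _, _, heq⟩
      · rw [heq]; exact hfalse hf1
      · rw [heq] at hf; simp at hf
    obtain ⟨r1, r2, r3, r4⟩ := ih (fun p hp => hks p (List.mem_cons_of_mem _ hp))
      (pvPassStep grid st x) hJ' hle' hfalse'' htrue'
    refine ⟨r1, r2, fun hf => ?_, r4⟩
    obtain ⟨g1, g2, g3⟩ := r3 hf
    obtain ⟨g4, g5⟩ := hfalse' g2
    have hstd0 : st.1 = d0 := hfalse g4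
    refine ⟨g1, g4, fun p hp => ?_⟩
    rcases List.mem_cons.mp hp with rfl | hp'
    · rw [← hstd0]; exact g5
    · exact g3 p hp'

-- the while-loop reaches a fixpoint with the given fuel
theorem relax_spec (grid : List (List Int)) (h w : Int) :
    ∀ (fuel : Nat) (d : PySem.Dict (Int × Int) Int), pvJ grid h w d →
    pvSB grid h w d + 1 ≤ fuel →
    pvJ grid h w (pvRelax grid fuel d) ∧
    ∀ p ∈ pvGoods grid h w, pvLocalFix grid (pvRelax grid fuel d) p := by
  intro fuel
  induction fuel with
  | zero => intro d _ hf; omega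
  | succ fuel ih =>
    intro d hJ hf
    have hks : ∀ p ∈ d.keys, p ∈ pvGoods grid h w := by
      rw [hJ.1]; exact fun p hp => hp
    obtain ⟨r1, r2, r3, r4⟩ := pass_fold grid h w d hJ d.keys hks (d, false) hJ
      (fun x _ => le_rfl) (fun _ => rfl) (by simp)
    have hpass : pvPass grid d = d.keys.foldl (pvPassStep grid) (d, false) := rfl
    rw [← hpass] at r1 r2 r3 r4
    have hunf : pvRelax grid (fuel + 1) d
        = if (pvPass grid d).2 then pvRelax grid fuel (pvPass grid d).1
          else (pvPass grid d).1 := rfl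
    rw [hunf]
    by_cases hch : (pvPass grid d).2 = true
    · rw [if_pos hch]
      exact ih (pvPass grid d).1 r1 (by have := r4 hch; omega)
    · rw [Bool.not_eq_true] at hch
      rw [if_neg (by rw [hch]; simp)]
      obtain ⟨g1, _, g3⟩ := r3 hch
      refine ⟨by rw [g1]; exact hJ, fun p hp => ?_⟩
      rw [g1]
      exact g3 p (by rw [hJ.1]; exact hp)

-- ---- at the fixpoint labels are constant on components and equal the minimal index ----

theorem fix_const (grid : List (List Int)) (h w : Int) (lab : PySem.Dict (Int × Int) Int)
    (hkeys : lab.keys = pvGoods grid h w)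
    (hfix : ∀ p ∈ pvGoods grid h w, pvLocalFix grid lab p)
    (p : Int × Int) (hp : p ∈ pvGoods grid h w) (z : Int × Int)
    (hz : pvReach grid h w (pvVal grid p) [] p z) :
    z ∈ pvGoods grid h w ∧ lab.getD z 0 = lab.getD p 0 := by
  have hpb := (mem_pvGoods grid h w p).mp hp
  induction hz with
  | base => exact ⟨hp, rfl⟩
  | @step y x hry hn hb hv _ ih =>
    obtain ⟨hyg, hyeq⟩ := ih
    have hyv := (pvReach_prop grid h w (pvVal grid p) [] p y hpb.1 rfl (by simp) hry).2.1
    have hxg : x ∈ pvGoods grid h w :=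
      (mem_pvGoods grid h w x).mpr ⟨hb, by rw [hv]; exact hpb.2⟩
    have hcx : lab.contains x = true := by
      rw [PySem.Dict.contains_iff_mem_keys, hkeys]; exact hxg
    have hcy : lab.contains y = true := by
      rw [PySem.Dict.contains_iff_mem_keys, hkeys]; exact hyg
    have h1 : lab.getD y 0 ≤ lab.getD x 0 :=
      hfix y hyg x ((mem_pvNbrsUp x y).mpr hn) hcx (by rw [hv, hyv])
    have h2 : lab.getD x 0 ≤ lab.getD y 0 :=
      hfix x hxg y ((mem_pvNbrsUp y x).mpr ((mem_pvNbrs_symm x y).mp hn)) hcy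
        (by rw [hv, hyv])
    refine ⟨hxg, ?_⟩
    omega

def pvIsMin (grid : List (List Int)) (h w : Int) (p m : Int × Int) : Prop :=
  pvReach grid h w (pvVal grid p) [] p m ∧
  ∀ z, pvReach grid h w (pvVal grid p) [] p z → pvIdx w m ≤ pvIdx w z

theorem lab_char (grid : List (List Int)) (h w : Int) (lab : PySem.Dict (Int × Int) Int)
    (hJ : pvJ grid h w lab)
    (hfix : ∀ p ∈ pvGoods grid h w, pvLocalFix grid lab p)
    (p : Int × Int) (hp : p ∈ pvGoods grid h w) (m : Int × Int)
    (hm : pvIsMin grid h w p m) :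
    lab.get? p = some (pvIdx w m) := by
  have hpb := (mem_pvGoods grid h w p).mp hp
  obtain ⟨hmg, hmeq⟩ := fix_const grid h w lab hJ.1 hfix p hp m hm.1
  have hmv := (pvReach_prop grid h w (pvVal grid p) [] p m hpb.1 rfl (by simp) hm.1).2.1
  obtain ⟨u, hu1, hu2, _, hu4⟩ := pvJ_getD grid h w lab hJ m hmg
  have hRpu : pvReach grid h w (pvVal grid p) [] p u :=
    reach_trans grid h w (pvVal grid p) p m u hm.1 (hmv ▸ hu1)
  have hmin := hm.2 u hRpu
  have hgm : lab.getD m 0 = pvIdx w m := by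
    rw [hu2] at hmeq ⊢
    rw [hu2] at hu4
    omega
  obtain ⟨qp, _, hqp2, _⟩ := hJ.2 p hp
  have hgp : lab.getD p 0 = pvIdx w qp := PySem.Dict.getD_of_get?_eq_some _ _ hqp2
  rw [hqp2]
  congr 1
  rw [← hgp, ← hmeq, hgm]

-- ---- the concrete label map of B and its characterization ----

theorem label0_get (grid : List (List Int)) (h w : Int) (p : Int × Int)
    (hp : p ∈ pvGoods grid h w) : (pvLabel0 grid h w).get? p = some (pvIdx w p) := by
  apply PySem.Dict.get?_of_mem_items
  · rw [label0_items]
    exact List.mem_map.mpr ⟨p, hp, rfl⟩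
  · rw [label0_keys]; exact nodup_pvGoods grid h w

theorem get_none_of_not_goods (grid : List (List Int)) (h w : Int)
    (lab : PySem.Dict (Int × Int) Int) (hkeys : lab.keys = pvGoods grid h w)
    (p : Int × Int) (hp : p ∉ pvGoods grid h w) : lab.get? p = none := by
  rw [PySem.Dict.get?_eq_none_iff_not_mem_keys, hkeys]
  exact hp

theorem SB_label0_le (grid : List (List Int)) (h w : Int)
    (hh : h.toNat = grid.length) (hw : w.toNat = (grid.headD []).length) :
    pvSB grid h w (pvLabel0 grid h w) + 1 ≤ pvFuelB grid := by
  have hfuel : pvFuelB grid = h.toNat * w.toNat * (h.toNat * w.toNat) + 2 := by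
    unfold pvFuelB; rw [hh, hw]
  by_cases hg : pvGoods grid h w = []
  · unfold pvSB
    rw [hg]
    simp [hfuel]
  · obtain ⟨p0, hp0⟩ := List.exists_mem_of_ne_nil _ hg
    have hb0 := ((mem_pvGoods grid h w p0).mp hp0).1
    rw [pvInB_iff] at hb0
    have hh0 : 0 < h := by omega
    have hw0 : 0 < w := by omega
    set N := h.toNat * w.toNat with hN
    have hNpos : 0 < N := by
      rw [hN]
      have : 0 < h.toNat := by omega
      have : 0 < w.toNat := by omega
      positivity
    have hterm : ∀ p ∈ pvGoods grid h w, ((pvLabel0 grid h w).getD p 0).toNat ≤ N - 1 := by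
      intro p hp
      have hgd : (pvLabel0 grid h w).getD p 0 = pvIdx w p :=
        PySem.Dict.getD_of_get?_eq_some _ _ (label0_get grid h w p hp)
      have hb := ((mem_pvGoods grid h w p).mp hp).1
      have h1 := pvIdx_lt h w p hb
      have h2 := pvIdx_nonneg h w p hb
      have hhw : h * w = ((N : Int)) := by
        rw [hN]
        push_cast
        rw [Int.toNat_of_nonneg (by omega), Int.toNat_of_nonneg (by omega)]
      rw [hgd]
      omega
    have hlen : (pvGoods grid h w).length ≤ N := by
      have h1 := List.length_filter_le (fun p => pvVal grid p != 0) (pvCells h w)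
      have h2 := length_pvCells h w
      unfold pvGoods
      omega
    have hsum : pvSB grid h w (pvLabel0 grid h w) ≤ (pvGoods grid h w).length * (N - 1) := by
      unfold pvSB
      have := List.sum_le_card_nsmul
        ((pvGoods grid h w).map (fun p => ((pvLabel0 grid h w).getD p 0).toNat)) (N - 1)
        (by
          intro x hx
          obtain ⟨p, hp, rfl⟩ := List.mem_map.mp hx
          exact hterm p hp)
      simpa [smul_eq_mul] using this
    have hmul : (pvGoods grid h w).length * (N - 1) ≤ N * N := by
      calc (pvGoods grid h w).length * (N - 1) ≤ N * (N - 1) :=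
            Nat.mul_le_mul_right _ hlen
        _ ≤ N * N := Nat.mul_le_mul_left _ (by omega)
    rw [hfuel]
    omega

def pvLab (grid : List (List Int)) (h w : Int) : PySem.Dict (Int × Int) Int :=
  pvRelax grid (pvFuelB grid) (pvLabel0 grid h w)

theorem pvLab_spec (grid : List (List Int)) (h w : Int)
    (hh : h.toNat = grid.length) (hw : w.toNat = (grid.headD []).length) :
    pvJ grid h w (pvLab grid h w) ∧
    ∀ p ∈ pvGoods grid h w, pvLocalFix grid (pvLab grid h w) p :=
  relax_spec grid h w (pvFuelB grid) (pvLabel0 grid h w) (label0_J grid h w)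
    (SB_label0_le grid h w hh hw)

-- the label of a good cell is the row-major-minimal cell of its component
theorem pvLab_get (grid : List (List Int)) (h w : Int)
    (hh : h.toNat = grid.length) (hw : w.toNat = (grid.headD []).length)
    (p : Int × Int) (hp : p ∈ pvGoods grid h w) (m : Int × Int)
    (hm : pvIsMin grid h w p m) : (pvLab grid h w).get? p = some (pvIdx w m) := by
  obtain ⟨hJ, hfix⟩ := pvLab_spec grid h w hh hw
  exact lab_char grid h w (pvLab grid h w) hJ hfix p hp m hm

-- which cells carry the label of a given self-minimal root
theorem pvLab_class (grid : List (List Int)) (h w : Int)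
    (hh : h.toNat = grid.length) (hw : w.toNat = (grid.headD []).length)
    (r : Int × Int) (hr : r ∈ pvGoods grid h w) (hrmin : pvIsMin grid h w r r)
    (z : Int × Int) :
    (pvLab grid h w).get? z = some (pvIdx w r) ↔
      z ∈ pvGoods grid h w ∧ pvReach grid h w (pvVal grid r) [] r z := by
  obtain ⟨hJ, hfix⟩ := pvLab_spec grid h w hh hw
  have hrb := (mem_pvGoods grid h w r).mp hr
  constructor
  · intro hget
    have hzg : z ∈ pvGoods grid h w := by
      by_contra hc
      rw [get_none_of_not_goods grid h w _ hJ.1 z hc] at hget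
      exact absurd hget (by simp)
    have hzb := (mem_pvGoods grid h w z).mp hzg
    obtain ⟨mz, hmz1, hmz2⟩ := reach_exists_min grid h w (pvVal grid z) z hzb.1 rfl
    have hmzmin : pvIsMin grid h w z mz := ⟨hmz1, hmz2⟩
    have hgz := pvLab_get grid h w hh hw z hzg mz hmzmin
    rw [hget] at hgz
    have hidx : pvIdx w mz = pvIdx w r := by
      injection hgz with hgz
      omega
    have hmzb := (pvReach_prop grid h w (pvVal grid z) [] z mz hzb.1 rfl (by simp) hmz1).1
    have hmzr : mz = r := pvIdx_inj h w mz r hmzb hrb.1 hidx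
    subst hmzr
    have hRzr := hmz1
    have hRrz : pvReach grid h w (pvVal grid z) [] mz z :=
      reach_symm grid h w (pvVal grid z) z mz hzb.1 rfl hRzr
    have hvz : pvVal grid mz = pvVal grid z :=
      (pvReach_prop grid h w (pvVal grid z) [] z mz hzb.1 rfl (by simp) hRzr).2.1
    exact ⟨hzg, hvz ▸ hRrz⟩
  · rintro ⟨hzg, hRrz⟩
    have hzb := (mem_pvGoods grid h w z).mp hzg
    have hvz : pvVal grid z = pvVal grid r :=
      (pvReach_prop grid h w (pvVal grid r) [] r z hrb.1 rfl (by simp) hRrz).2.1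
    have hRzr : pvReach grid h w (pvVal grid z) [] z r := by
      rw [hvz]
      exact reach_symm grid h w (pvVal grid r) r z hrb.1 rfl hRrz
    have hmin : pvIsMin grid h w z r := by
      refine ⟨hRzr, fun y hy => ?_⟩
      have hRry : pvReach grid h w (pvVal grid r) [] r y :=
        reach_trans grid h w (pvVal grid r) r z y hRrz (hvz ▸ hy)
      exact hrmin.2 y hRry
    exact pvLab_get grid h w hh hw z hzg r hmin

-- ---- A's scan: converting visited-avoiding reach to plain reach ----

theorem reach_of_reachVis (grid : List (List Int)) (h w c : Int) (V : List (Int × Int))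
    (s z : Int × Int) (hr : pvReach grid h w c V s z) : pvReach grid h w c [] s z := by
  induction hr with
  | base => exact pvReach.base
  | step hr hn hb hv _ ih => exact pvReach.step ih hn hb hv (by simp)

theorem reachVis_of_reach (grid : List (List Int)) (h w c : Int) (V : List (Int × Int))
    (s : Int × Int)
    (hV : ∀ y, pvInB h w y = true → pvVal grid y = c → pvReach grid h w c [] s y → y ∉ V) :
    ∀ z, pvReach grid h w c [] s z → pvReach grid h w c V s z := by
  intro z hr
  induction hr with
  | base => exact pvReach.base
  | @step y x hry hn hb hv _ ih =>
    exact pvReach.step ih hn hb hv (hV x hb hv (pvReach.step hry hn hb hv (by simp)))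

-- the property that each component list collected by A satisfies
def pvCompOK (grid : List (List Int)) (h w : Int) (L : List (Int × Int)) (r : Int × Int) : Prop :=
  L.Nodup ∧ ∀ z, z ∈ L ↔ pvReach grid h w (pvVal grid r) [] r z

theorem forall2_append {A B : Type} (R : A → B → Prop) {a c : List A} {b d : List B}
    (h1 : List.Forall₂ R a b) (h2 : List.Forall₂ R c d) :
    List.Forall₂ R (a ++ c) (b ++ d) := by
  induction h1 with
  | nil => simpa using h2
  | cons hx _ ih => exact List.Forall₂.cons hx ih

-- the big scan invariant, pushed through A's component-collection loop
theorem scanA_char (grid : List (List Int)) (h w : Int)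
    (hh : h.toNat = grid.length) (hw : w.toNat = (grid.headD []).length) :
    ∀ (cells done roots vis : List (Int × Int))
      (d : PySem.Dict Int (List (List (Int × Int)))),
    pvCells h w = done ++ cells →
    (∀ z, z ∈ vis ↔ ∃ p ∈ done, p ∈ pvGoods grid h w ∧ pvReach grid h w (pvVal grid p) [] p z) →
    d.keys = PySem.Set.ofList ((done.filter (fun p => pvVal grid p != 0)).map (pvVal grid)) →
    (∀ r ∈ roots, r ∈ pvGoods grid h w ∧ pvIsMin grid h w r r ∧ r ∈ done) →
    (∀ p ∈ done, p ∈ pvGoods grid h w → ∀ m, pvIsMin grid h w p m → m ∈ roots) →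
    roots.Pairwise (fun a b => pvIdx w a < pvIdx w b) →
    (∀ c Ls, d.get? c = some Ls → Ls ≠ [] ∧
      List.Forall₂ (pvCompOK grid h w) Ls (roots.filter (fun r => pvVal grid r == c))) →
    ∃ roots' : List (Int × Int),
      ((scanA grid h w cells vis d).2).keys
        = PySem.Set.ofList (((done ++ cells).filter (fun p => pvVal grid p != 0)).map (pvVal grid)) ∧
      (∀ r ∈ roots', r ∈ pvGoods grid h w ∧ pvIsMin grid h w r r) ∧
      (∀ p ∈ done ++ cells, p ∈ pvGoods grid h w → ∀ m, pvIsMin grid h w p m → m ∈ roots') ∧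
      roots'.Pairwise (fun a b => pvIdx w a < pvIdx w b) ∧
      (∀ c Ls, ((scanA grid h w cells vis d).2).get? c = some Ls → Ls ≠ [] ∧
        List.Forall₂ (pvCompOK grid h w) Ls (roots'.filter (fun r => pvVal grid r == c))) := by
  intro cells
  induction cells with
  | nil =>
    intro done roots vis d hpfx hI1 hI2 hI3 hI4 hI6 hI5
    refine ⟨roots, ?_, fun r hr => ⟨(hI3 r hr).1, (hI3 r hr).2.1⟩, ?_, hI6, hI5⟩
    · simpa using hI2
    · intro p hp hpg m hm
      rw [List.append_nil] at hp
      exact hI4 p hp hpg m hm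
  | cons x rest ih =>
    intro done roots vis d hpfx hI1 hI2 hI3 hI4 hI6 hI5
    have hxcells : x ∈ pvCells h w := by rw [hpfx]; simp
    have hxb : pvInB h w x = true := (mem_pvCells h w x).mp hxcells
    have hpw : (done ++ x :: rest).Pairwise (fun a b => pvIdx w a < pvIdx w b) := by
      rw [← hpfx]; exact pairwise_pvCells h w
    have hpwa := List.pairwise_append.mp hpw
    have hdone_lt : ∀ z ∈ done, pvIdx w z < pvIdx w x :=
      fun z hz => hpwa.2.2 z hz x List.mem_cons_self
    have hrest_gt : ∀ z ∈ rest, pvIdx w x < pvIdx w z :=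
      fun z hz => (List.pairwise_cons.mp hpwa.2.1).1 z hz
    have hpfx' : pvCells h w = (done ++ [x]) ++ rest := by rw [hpfx]; simp
    by_cases hg : (pvVal grid x != 0 && !vis.contains x) = true
    · -- ---- a fresh component is flooded from x ----
      have hgx : pvVal grid x ≠ 0 ∧ x ∉ vis := by
        simp only [Bool.and_eq_true, bne_iff_ne, Bool.not_eq_true', contains_cell,
          decide_eq_false_iff_not] at hg
        exact hg
      have hxg : x ∈ pvGoods grid h w := (mem_pvGoods grid h w x).mpr ⟨hxb, hgx.1⟩
      -- cells seen before x are exactly those with smaller index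
      have hmem_done : ∀ z, pvInB h w z = true → pvIdx w z < pvIdx w x → z ∈ done := by
        intro z hzb hzlt
        have : z ∈ done ++ x :: rest := by rw [← hpfx]; exact (mem_pvCells h w z).mpr hzb
        rcases List.mem_append.mp this with hz | hz
        · exact hz
        · rcases List.mem_cons.mp hz with rfl | hz
          · omega
          · have := hrest_gt z hz; omega
      -- x is the minimal cell of its component
      have hminx : pvIsMin grid h w x x := by
        refine ⟨pvReach.base, fun z hz => ?_⟩
        by_contra hlt
        push_neg at hlt
        have hzp := pvReach_prop grid h w (pvVal grid x) [] x z hxb rfl (by simp) hz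
        have hzdone : z ∈ done := hmem_done z hzp.1 hlt
        have hzg : z ∈ pvGoods grid h w := (mem_pvGoods grid h w z).mpr ⟨hzp.1, by
          rw [hzp.2.1]; exact hgx.1⟩
        have hRzx : pvReach grid h w (pvVal grid z) [] z x := by
          rw [hzp.2.1]
          exact reach_symm grid h w (pvVal grid x) x z hxb rfl hz
        exact hgx.2 ((hI1 x).mpr ⟨z, hzdone, hzg, hRzx⟩)
      -- nothing reachable from x has been visited
      have havoid : ∀ y, pvInB h w y = true → pvVal grid y = pvVal grid x →
          pvReach grid h w (pvVal grid x) [] x y → y ∉ vis := by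
        intro y hyb hyv hRxy hyvis
        obtain ⟨p0, hp0d, hp0g, hRp0y⟩ := (hI1 y).mp hyvis
        have hp0b := (mem_pvGoods grid h w p0).mp hp0g
        have hvy : pvVal grid y = pvVal grid p0 :=
          (pvReach_prop grid h w (pvVal grid p0) [] p0 y hp0b.1 rfl (by simp) hRp0y).2.1
        have hRyx : pvReach grid h w (pvVal grid p0) [] y x := by
          have := reach_symm grid h w (pvVal grid x) x y hxb rfl hRxy
          rw [← hyv, hvy] at this
          exact this
        exact hgx.2 ((hI1 x).mpr
          ⟨p0, hp0d, hp0g, reach_trans grid h w (pvVal grid p0) p0 y x hRp0y hRyx⟩)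
      -- run the flood fill
      have hfuel : 2 * pvUcount h w (x :: vis) + 1 ≤ pvFuelA grid := by
        have h1 := pvUcount_le h w (x :: vis)
        have h3 : 2 * grid.length * (grid.headD []).length
            = 2 * (grid.length * (grid.headD []).length) := by ring
        have hhw : h.toNat * w.toNat = grid.length * (grid.headD []).length := by
          rw [hh, hw]
        unfold pvFuelA
        omega
      have hrun := bfsA_run grid h w (pvVal grid x) vis x (pvFuelA grid) hxb rfl hgx.2 hfuel
      set comp := (bfsA grid h w (pvVal grid x) (pvFuelA grid) [x] (x :: vis) []).1 with hcomp
      have hcompmem : ∀ z, z ∈ comp ↔ pvReach grid h w (pvVal grid x) [] x z := by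
        intro z
        rw [hrun.1 z]
        constructor
        · exact reach_of_reachVis grid h w (pvVal grid x) vis x z
        · exact reachVis_of_reach grid h w (pvVal grid x) vis x havoid z
      have hstep : scanA grid h w (x :: rest) vis d
          = scanA grid h w rest
              (bfsA grid h w (pvVal grid x) (pvFuelA grid) [x] (x :: vis) []).2
              (d.insert (pvVal grid x) ((d.getD (pvVal grid x) []) ++ [comp])) := by
        simp only [scanA, hg, if_pos]
        rw [hcomp]
      rw [hstep]
      -- new invariants for done ++ [x]
      have hI1' : ∀ z, z ∈ (bfsA grid h w (pvVal grid x) (pvFuelA grid) [x] (x :: vis) []).2 ↔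
          ∃ p ∈ done ++ [x], p ∈ pvGoods grid h w ∧ pvReach grid h w (pvVal grid p) [] p z := by
        intro z
        rw [hrun.2.2 z]
        constructor
        · rintro (hz | hz)
          · obtain ⟨p, hp1, hp2, hp3⟩ := (hI1 z).mp hz
            exact ⟨p, by simp [hp1], hp2, hp3⟩
          · exact ⟨x, by simp, hxg, (hcompmem z).mp hz⟩
        · rintro ⟨p, hp1, hp2, hp3⟩
          rcases List.mem_append.mp hp1 with hp1 | hp1
          · exact Or.inl ((hI1 z).mpr ⟨p, hp1, hp2, hp3⟩)
          · have : p = x := by simpa using hp1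
            subst this
            exact Or.inr ((hcompmem z).mpr hp3)
      have hfilter' : (done ++ [x]).filter (fun p => pvVal grid p != 0)
          = done.filter (fun p => pvVal grid p != 0) ++ [x] := by
        rw [List.filter_append]
        congr 1
        simp [hgx.1]
      have hI3' : ∀ r ∈ roots ++ [x],
          r ∈ pvGoods grid h w ∧ pvIsMin grid h w r r ∧ r ∈ done ++ [x] := by
        intro r hr
        rcases List.mem_append.mp hr with hr | hr
        · obtain ⟨a1, a2, a3⟩ := hI3 r hr
          exact ⟨a1, a2, by simp [a3]⟩
        · have : r = x := by simpa using hr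
          subst this
          exact ⟨hxg, hminx, by simp⟩
      have hI4' : ∀ p ∈ done ++ [x], p ∈ pvGoods grid h w →
          ∀ m, pvIsMin grid h w p m → m ∈ roots ++ [x] := by
        intro p hp hpg m hm
        rcases List.mem_append.mp hp with hp | hp
        · exact List.mem_append.mpr (Or.inl (hI4 p hp hpg m hm))
        · have : p = x := by simpa using hp
          subst this
          have := reach_min_unique grid h w (pvVal grid p) p m p
            ((mem_pvGoods grid h w p).mp hpg).1 rfl hm.1 hm.2 hminx.1 hminx.2
          subst this
          simp
      have hI6' : (roots ++ [x]).Pairwise (fun a b => pvIdx w a < pvIdx w b) := by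
        rw [List.pairwise_append]
        refine ⟨hI6, by simp, ?_⟩
        intro a ha b hb
        have : b = x := by simpa using hb
        subst this
        exact hdone_lt a (hI3 a ha).2.2
      have hccomp : pvCompOK grid h w comp x := ⟨hrun.2.1, hcompmem⟩
      have hI2' : (d.insert (pvVal grid x) ((d.getD (pvVal grid x) []) ++ [comp])).keys
          = PySem.Set.ofList (((done ++ [x]).filter (fun p => pvVal grid p != 0)).map (pvVal grid)) := by
        rw [hfilter', List.map_append]
        simp only [List.map_cons, List.map_nil]
        rw [PySem.Set.ofList_append_singleton, ← hI2]
        by_cases hc : d.contains (pvVal grid x) = true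
        · rw [PySem.Dict.keys_insert_of_contains _ _ hc,
            PySem.Set.add_of_mem ((PySem.Dict.contains_iff_mem_keys d _).mp hc)]
        · have hc' : d.contains (pvVal grid x) = false := by
            cases hcv : d.contains (pvVal grid x)
            · rfl
            · exact absurd hcv hc
          rw [PySem.Dict.keys_insert_of_not_contains _ _ hc',
            PySem.Set.add_of_not_mem (fun hm => by
              rw [← PySem.Dict.contains_iff_mem_keys] at hm
              rw [hm] at hc'
              simp at hc')]
      have hrfilter_ne : ∀ c, c ≠ pvVal grid x →
          (roots ++ [x]).filter (fun r => pvVal grid r == c)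
            = roots.filter (fun r => pvVal grid r == c) := by
        intro c hcn
        rw [List.filter_append]
        have : [x].filter (fun r => pvVal grid r == c) = [] := by
          simp [beq_iff_eq]
          exact fun hcv => absurd hcv.symm hcn
        rw [this, List.append_nil]
      have hI5' : ∀ c Ls,
          (d.insert (pvVal grid x) ((d.getD (pvVal grid x) []) ++ [comp])).get? c = some Ls →
          Ls ≠ [] ∧ List.Forall₂ (pvCompOK grid h w) Ls
            ((roots ++ [x]).filter (fun r => pvVal grid r == c)) := by
        intro c Ls hLs
        by_cases hcx : c = pvVal grid x
        · subst hcx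
          rw [PySem.Dict.get?_insert_self] at hLs
          injection hLs with hLs
          subst hLs
          have hfr : (roots ++ [x]).filter (fun r => pvVal grid r == pvVal grid x)
              = roots.filter (fun r => pvVal grid r == pvVal grid x) ++ [x] := by
            rw [List.filter_append]
            congr 1
            simp
          rw [hfr]
          refine ⟨by simp, ?_⟩
          by_cases hc : d.contains (pvVal grid x) = true
          · obtain ⟨Ls₀, hLs₀⟩ : ∃ Ls₀, d.get? (pvVal grid x) = some Ls₀ := by
              have := PySem.Dict.contains_eq_isSome_get? (d := d) (k := pvVal grid x)
              rw [hc] at this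
              exact Option.isSome_iff_exists.mp this.symm
            rw [PySem.Dict.getD_of_get?_eq_some _ _ hLs₀]
            exact forall2_append _ ((hI5 (pvVal grid x) Ls₀ hLs₀).2)
              (List.forall₂_cons.mpr ⟨hccomp, List.Forall₂.nil⟩)
          · have hc' : d.contains (pvVal grid x) = false := by
              cases hcv : d.contains (pvVal grid x)
              · rfl
              · exact absurd hcv hc
            have hroots_nil : roots.filter (fun r => pvVal grid r == pvVal grid x) = [] := by
              rw [List.eq_nil_iff_forall_not_mem]
              intro r hr
              have hrm := List.mem_filter.mp hr
              have hr3 := hI3 r hrm.1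
              have hrc : pvVal grid r = pvVal grid x := by simpa using hrm.2
              have hck : pvVal grid x ∈ d.keys := by
                rw [hI2, PySem.Set.mem_ofList]
                refine List.mem_map.mpr ⟨r, ?_, hrc⟩
                rw [List.mem_filter]
                exact ⟨hr3.2.2, by simp [((mem_pvGoods grid h w r).mp hr3.1).2]⟩
              rw [← PySem.Dict.contains_iff_mem_keys] at hck
              rw [hck] at hc'
              simp at hc'
            rw [PySem.Dict.getD_of_not_contains _ _ hc', hroots_nil]
            simpa using List.forall₂_cons.mpr ⟨hccomp, List.Forall₂.nil⟩
        · rw [PySem.Dict.get?_insert_of_ne _ _ hcx] at hLs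
          rw [hrfilter_ne c hcx]
          exact hI5 c Ls hLs
      obtain ⟨roots', hr1, hr2, hr3, hr4, hr5⟩ := ih (done ++ [x]) (roots ++ [x])
        (bfsA grid h w (pvVal grid x) (pvFuelA grid) [x] (x :: vis) []).2
        (d.insert (pvVal grid x) ((d.getD (pvVal grid x) []) ++ [comp]))
        hpfx' hI1' hI2' hI3' hI4' hI6' hI5'
      refine ⟨roots', by simpa using hr1, hr2, ?_, hr4, hr5⟩
      intro p hp hpg m hm
      apply hr3 p _ hpg m hm
      simp only [List.mem_append, List.mem_cons] at hp ⊢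
      tauto
    · -- ---- the guard fails: either a zero cell or an already-visited cell ----
      have hstep : scanA grid h w (x :: rest) vis d = scanA grid h w rest vis d := by
        simp only [scanA]
        rw [Bool.not_eq_true] at hg
        rw [if_neg (by rw [hg]; simp)]
      rw [hstep]
      simp only [Bool.and_eq_true, bne_iff_ne, Bool.not_eq_true', contains_cell,
        decide_eq_false_iff_not, not_and, Classical.not_not] at hg
      by_cases hval : pvVal grid x = 0
      · -- zero cell: nothing changes
        have hfilter' : (done ++ [x]).filter (fun p => pvVal grid p != 0)
            = done.filter (fun p => pvVal grid p != 0) := by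
          rw [List.filter_append]
          simp [hval]
        have hI1' : ∀ z, z ∈ vis ↔
            ∃ p ∈ done ++ [x], p ∈ pvGoods grid h w ∧ pvReach grid h w (pvVal grid p) [] p z := by
          intro z
          rw [hI1 z]
          constructor
          · rintro ⟨p, hp1, hp2, hp3⟩
            exact ⟨p, by simp [hp1], hp2, hp3⟩
          · rintro ⟨p, hp1, hp2, hp3⟩
            rcases List.mem_append.mp hp1 with hp1 | hp1
            · exact ⟨p, hp1, hp2, hp3⟩
            · have : p = x := by simpa using hp1
              subst this
              exact absurd ((mem_pvGoods grid h w p).mp hp2).2 (by simp [hval])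
        obtain ⟨roots', hr1, hr2, hr3, hr4, hr5⟩ := ih (done ++ [x]) roots vis d hpfx' hI1'
          (by rw [hfilter']; exact hI2)
          (fun r hr => ⟨(hI3 r hr).1, (hI3 r hr).2.1, by simp [(hI3 r hr).2.2]⟩)
          (by
            intro p hp hpg m hm
            rcases List.mem_append.mp hp with hp | hp
            · exact hI4 p hp hpg m hm
            · have : p = x := by simpa using hp
              subst this
              exact absurd ((mem_pvGoods grid h w p).mp hpg).2 (by simp [hval]))
          hI6 hI5
        refine ⟨roots', by simpa using hr1, hr2, ?_, hr4, hr5⟩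
        intro p hp hpg m hm
        apply hr3 p _ hpg m hm
        simp only [List.mem_append, List.mem_cons] at hp ⊢
        tauto
      · -- visited cell: its whole component is already in vis and its color is known
        have hxvis : x ∈ vis := hg hval
        obtain ⟨p0, hp0d, hp0g, hRp0x⟩ := (hI1 x).mp hxvis
        have hp0b := (mem_pvGoods grid h w p0).mp hp0g
        have hvx : pvVal grid x = pvVal grid p0 :=
          (pvReach_prop grid h w (pvVal grid p0) [] p0 x hp0b.1 rfl (by simp) hRp0x).2.1
        have hxg : x ∈ pvGoods grid h w := (mem_pvGoods grid h w x).mpr ⟨hxb, hval⟩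
        have hfilter' : (done ++ [x]).filter (fun p => pvVal grid p != 0)
            = done.filter (fun p => pvVal grid p != 0) ++ [x] := by
          rw [List.filter_append]
          congr 1
          simp [hval]
        have hI1' : ∀ z, z ∈ vis ↔
            ∃ p ∈ done ++ [x], p ∈ pvGoods grid h w ∧ pvReach grid h w (pvVal grid p) [] p z := by
          intro z
          constructor
          · rintro hz
            obtain ⟨p, hp1, hp2, hp3⟩ := (hI1 z).mp hz
            exact ⟨p, by simp [hp1], hp2, hp3⟩
          · rintro ⟨p, hp1, hp2, hp3⟩
            rcases List.mem_append.mp hp1 with hp1 | hp1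
            · exact (hI1 z).mpr ⟨p, hp1, hp2, hp3⟩
            · have : p = x := by simpa using hp1
              subst this
              refine (hI1 z).mpr ⟨p0, hp0d, hp0g, ?_⟩
              refine reach_trans grid h w (pvVal grid p0) p0 p z hRp0x ?_
              rw [← hvx]
              exact hp3
        have hI2' : d.keys
            = PySem.Set.ofList (((done ++ [x]).filter (fun p => pvVal grid p != 0)).map (pvVal grid)) := by
          rw [hfilter', List.map_append]
          simp only [List.map_cons, List.map_nil]
          rw [PySem.Set.ofList_append_singleton, ← hI2, PySem.Set.add_of_mem]
          rw [hI2, PySem.Set.mem_ofList]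
          refine List.mem_map.mpr ⟨p0, ?_, hvx.symm⟩
          rw [List.mem_filter]
          exact ⟨hp0d, by simp [hp0b.2]⟩
        obtain ⟨roots', hr1, hr2, hr3, hr4, hr5⟩ := ih (done ++ [x]) roots vis d hpfx' hI1' hI2'
          (fun r hr => ⟨(hI3 r hr).1, (hI3 r hr).2.1, by simp [(hI3 r hr).2.2]⟩)
          (by
            intro p hp hpg m hm
            rcases List.mem_append.mp hp with hp | hp
            · exact hI4 p hp hpg m hm
            · have hpx : p = x := by simpa using hp
              subst hpx
              -- the minimum of x's component is the minimum of p0's component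
              have hRxp0 : pvReach grid h w (pvVal grid p) [] p p0 := by
                rw [hvx]
                exact reach_symm grid h w (pvVal grid p0) p0 p hp0b.1 rfl hRp0x
              have hmp0 : pvIsMin grid h w p0 m := by
                refine ⟨?_, fun y hy => ?_⟩
                · refine reach_trans grid h w (pvVal grid p0) p0 p m hRp0x ?_
                  rw [← hvx]
                  exact hm.1
                · apply hm.2
                  refine reach_trans grid h w (pvVal grid p) p p0 y hRxp0 ?_
                  rw [hvx]
                  exact hy
              exact hI4 p0 hp0d hp0g m hmp0)
          hI6 hI5
        refine ⟨roots', by simpa using hr1, hr2, ?_, hr4, hr5⟩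
        intro p hp hpg m hm
        apply hr3 p _ hpg m hm
        simp only [List.mem_append, List.mem_cons] at hp ⊢
        tauto

-- ---- component sizes via the label map ----

def pvSzN (grid : List (List Int)) (h w : Int) (r : Int × Int) : Nat :=
  ((pvGoods grid h w).filter
    (fun p => (pvLab grid h w).get? p == some (pvIdx w r))).length

theorem compOK_length (grid : List (List Int)) (h w : Int)
    (hh : h.toNat = grid.length) (hw : w.toNat = (grid.headD []).length)
    (L : List (Int × Int)) (r : Int × Int) (hr : r ∈ pvGoods grid h w)
    (hrmin : pvIsMin grid h w r r) (hL : pvCompOK grid h w L r) :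
    L.length = pvSzN grid h w r := by
  have hrb := (mem_pvGoods grid h w r).mp hr
  have hmem : ∀ z, z ∈ L ↔
      z ∈ (pvGoods grid h w).filter
        (fun p => (pvLab grid h w).get? p == some (pvIdx w r)) := by
    intro z
    rw [hL.2 z, List.mem_filter]
    constructor
    · intro hz
      have hcls := (pvLab_class grid h w hh hw r hr hrmin z).mpr
      have hzp := pvReach_prop grid h w (pvVal grid r) [] r z hrb.1 rfl (by simp) hz
      have hzg : z ∈ pvGoods grid h w :=
        (mem_pvGoods grid h w z).mpr ⟨hzp.1, by rw [hzp.2.1]; exact hrb.2⟩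
      exact ⟨hzg, by rw [hcls ⟨hzg, hz⟩]; simp⟩
    · rintro ⟨hzg, hzl⟩
      have := (pvLab_class grid h w hh hw r hr hrmin z).mp (by simpa using hzl)
      exact this.2
  have hnd2 : ((pvGoods grid h w).filter
      (fun p => (pvLab grid h w).get? p == some (pvIdx w r))).Nodup :=
    (nodup_pvGoods grid h w).filter _
  exact ((List.perm_ext_iff_of_nodup hL.1 hnd2).mpr hmem).length_eq

-- B's size dict is the counter of label values
theorem sizes_getD (grid : List (List Int)) (h w : Int)
    (hh : h.toNat = grid.length) (hw : w.toNat = (grid.headD []).length)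
    (v : Int) :
    (pvSizes (pvLab grid h w)).getD v 0
      = (((pvGoods grid h w).filter
          (fun p => (pvLab grid h w).get? p == some v)).length : Int) := by
  obtain ⟨hJ, _⟩ := pvLab_spec grid h w hh hw
  have hknd : (pvLab grid h w).keys.Nodup := by
    rw [hJ.1]; exact nodup_pvGoods grid h w
  unfold pvSizes
  rw [PySem.Dict.foldl_insert_getD_add_one_eq_counter, PySem.Dict.getD_counter]
  congr 1
  rw [PySem.Dict.values_eq_map_keys (pvLab grid h w) hknd 0, hJ.1]
  rw [List.count_eq_countP, List.countP_map, List.countP_eq_length_filter]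
  congr 1
  apply List.filter_congr
  intro p hp
  obtain ⟨q, _, hq2, _⟩ := hJ.2 p hp
  have hgd : (pvLab grid h w).getD p 0 = pvIdx w q :=
    PySem.Dict.getD_of_get?_eq_some _ _ hq2
  show ((pvLab grid h w).getD p 0 == v) = ((pvLab grid h w).get? p == some v)
  rw [hq2, hgd]
  by_cases hqv : pvIdx w q = v
  · simp [hqv]
  · simp [hqv]

-- ---- the distinguished root per color ----

def pvBest (grid : List (List Int)) (h w : Int) (c : Int) (ρ : Int × Int) : Prop :=
  ρ ∈ pvGoods grid h w ∧ pvIsMin grid h w ρ ρ ∧ pvVal grid ρ = c ∧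
  ∀ r', r' ∈ pvGoods grid h w → pvIsMin grid h w r' r' → pvVal grid r' = c →
    pvSzN grid h w r' < pvSzN grid h w ρ ∨
      (pvSzN grid h w r' = pvSzN grid h w ρ ∧ pvIdx w ρ ≤ pvIdx w r')

theorem pvBest_unique (grid : List (List Int)) (h w : Int) (c : Int) (ρ ρ' : Int × Int)
    (h1 : pvBest grid h w c ρ) (h2 : pvBest grid h w c ρ') : ρ = ρ' := by
  have ha := h1.2.2.2 ρ' h2.1 h2.2.1 h2.2.2.1
  have hb := h2.2.2.2 ρ h1.1 h1.2.1 h1.2.2.1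
  have hbρ := (mem_pvGoods grid h w ρ).mp h1.1
  have hbρ' := (mem_pvGoods grid h w ρ').mp h2.1
  apply pvIdx_inj h w ρ ρ' hbρ.1 hbρ'.1
  omega

-- A's first-maximal fold picks exactly the best root (sizes max, ties to the smallest root)
theorem maxfold_spec (grid : List (List Int)) (h w : Int)
    (hh : h.toNat = grid.length) (hw : w.toNat = (grid.headD []).length) :
    ∀ (rsC : List (Int × Int)) (Ls : List (List (Int × Int))),
    List.Forall₂ (pvCompOK grid h w) Ls rsC →
    ∀ (b0 : List (Int × Int)) (r0 : Int × Int), pvCompOK grid h w b0 r0 →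
    (∀ r ∈ r0 :: rsC, r ∈ pvGoods grid h w ∧ pvIsMin grid h w r r) →
    (r0 :: rsC).Pairwise (fun a b => pvIdx w a < pvIdx w b) →
    ∃ ρ ∈ r0 :: rsC,
      pvCompOK grid h w (Ls.foldl (fun b x => if b.length < x.length then x else b) b0) ρ ∧
      (∀ r' ∈ r0 :: rsC, pvSzN grid h w r' < pvSzN grid h w ρ ∨
        (pvSzN grid h w r' = pvSzN grid h w ρ ∧ pvIdx w ρ ≤ pvIdx w r')) := by
  intro rsC
  induction rsC with
  | nil =>
    intro Ls hF b0 r0 hb0 hg hpw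
    have hLs : Ls = [] := by cases hF; rfl
    subst hLs
    refine ⟨r0, List.mem_cons_self, hb0, ?_⟩
    intro r' hr'
    have : r' = r0 := by simpa using hr'
    subst this
    exact Or.inr ⟨rfl, le_rfl⟩
  | cons rx rsC' ih =>
    intro Ls hF b0 r0 hb0 hg hpw
    obtain ⟨x, Ls', hx, hF', rfl⟩ : ∃ x Ls', pvCompOK grid h w x rx ∧
        List.Forall₂ (pvCompOK grid h w) Ls' rsC' ∧ Ls = x :: Ls' := by
      cases hF with
      | cons h1 h2 => exact ⟨_, _, h1, h2, rfl⟩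
    have hg0 := hg r0 List.mem_cons_self
    have hgx := hg rx (by simp)
    have hlen0 : b0.length = pvSzN grid h w r0 :=
      compOK_length grid h w hh hw b0 r0 hg0.1 hg0.2 hb0
    have hlenx : x.length = pvSzN grid h w rx :=
      compOK_length grid h w hh hw x rx hgx.1 hgx.2 hx
    have hpw0 := List.pairwise_cons.mp hpw
    have hpwx := List.pairwise_cons.mp hpw0.2
    have h0x : pvIdx w r0 < pvIdx w rx := hpw0.1 rx (by simp)
    simp only [List.foldl_cons]
    by_cases hrep : b0.length < x.length
    · rw [if_pos hrep]
      have hpw' : (rx :: rsC').Pairwise (fun a b => pvIdx w a < pvIdx w b) := hpw0.2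
      obtain ⟨ρ, hρmem, hρOK, hρbest⟩ := ih Ls' hF' x rx hx
        (fun r hr => hg r (by simp only [List.mem_cons] at hr ⊢; tauto)) hpw'
      refine ⟨ρ, by simp only [List.mem_cons] at hρmem ⊢; tauto, hρOK, ?_⟩
      intro r' hr'
      rcases List.mem_cons.mp hr' with rfl | hr''
      · -- the dropped r0 is strictly smaller than rx ≤ ρ
        have hxbest := hρbest rx List.mem_cons_self
        omega
      · exact hρbest r' hr''
    · rw [if_neg hrep]
      have hpw' : (r0 :: rsC').Pairwise (fun a b => pvIdx w a < pvIdx w b) := by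
        rw [List.pairwise_cons]
        exact ⟨fun b hb => hpw0.1 b (by simp [hb]), hpwx.2⟩
      obtain ⟨ρ, hρmem, hρOK, hρbest⟩ := ih Ls' hF' b0 r0 hb0
        (fun r hr => hg r (by simp only [List.mem_cons] at hr ⊢; tauto)) hpw'
      refine ⟨ρ, by simp only [List.mem_cons] at hρmem ⊢; tauto, hρOK, ?_⟩
      intro r' hr'
      rcases List.mem_cons.mp hr' with rfl | hr''
      · exact hρbest r' (by simp)
      rcases List.mem_cons.mp hr'' with rfl | hr''
      · -- the dropped rx : its size is ≤ b0's = r0's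
        have h0best := hρbest r0 List.mem_cons_self
        by_cases htie : pvSzN grid h w r' = pvSzN grid h w ρ
        · right
          refine ⟨htie, ?_⟩
          have : pvSzN grid h w r0 = pvSzN grid h w ρ := by omega
          have hidx0 : pvIdx w ρ ≤ pvIdx w r0 := by
            rcases h0best with hlt | ⟨_, hle⟩
            · omega
            · exact hle
          omega
        · left
          omega
      · exact hρbest r' (by simp [hr''])

-- ---- B's per-color argmax over the label map ----

theorem isMin_props (grid : List (List Int)) (h w : Int) (p m : Int × Int)
    (hp : p ∈ pvGoods grid h w) (hm : pvIsMin grid h w p m) :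
    m ∈ pvGoods grid h w ∧ pvVal grid m = pvVal grid p ∧ pvIsMin grid h w m m := by
  have hpb := (mem_pvGoods grid h w p).mp hp
  have hmp := pvReach_prop grid h w (pvVal grid p) [] p m hpb.1 rfl (by simp) hm.1
  have hmg : m ∈ pvGoods grid h w :=
    (mem_pvGoods grid h w m).mpr ⟨hmp.1, by rw [hmp.2.1]; exact hpb.2⟩
  refine ⟨hmg, hmp.2.1, pvReach.base, fun z hz => ?_⟩
  have hz' : pvReach grid h w (pvVal grid p) [] m z := by rw [← hmp.2.1]; exact hz
  exact hm.2 z (reach_trans grid h w (pvVal grid p) p m z hm.1 hz')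

theorem rep_fold (grid : List (List Int)) (h w : Int)
    (hh : h.toNat = grid.length) (hw : w.toNat = (grid.headD []).length) :
    ∀ (ps procs : List (Int × Int)) (rep : PySem.Dict Int Int),
    (∀ p ∈ ps, p ∈ pvGoods grid h w) →
    rep.keys = PySem.Set.ofList (procs.map (pvVal grid)) →
    (∀ c ∈ rep.keys, ∃ ρ, rep.getD c 0 = pvIdx w ρ ∧ ρ ∈ pvGoods grid h w ∧
       pvIsMin grid h w ρ ρ ∧ pvVal grid ρ = c ∧
       ∀ p' ∈ procs, pvVal grid p' = c → ∀ m, pvIsMin grid h w p' m →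
         pvSzN grid h w m < pvSzN grid h w ρ ∨
           (pvSzN grid h w m = pvSzN grid h w ρ ∧ pvIdx w ρ ≤ pvIdx w m)) →
    ((ps.map (fun k => (k, (pvLab grid h w).getD k 0))).foldl
        (fun rep pr =>
          let col := pvVal grid pr.1
          if !rep.contains col
              || decide ((pvSizes (pvLab grid h w)).getD (rep.getD col 0) 0
                    < (pvSizes (pvLab grid h w)).getD pr.2 0)
              || ((pvSizes (pvLab grid h w)).getD pr.2 0
                    == (pvSizes (pvLab grid h w)).getD (rep.getD col 0) 0
                  && decide (pr.2 < rep.getD col 0))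
          then rep.insert col pr.2 else rep) rep).keys
      = PySem.Set.ofList ((procs ++ ps).map (pvVal grid)) ∧
    (∀ c ∈ ((ps.map (fun k => (k, (pvLab grid h w).getD k 0))).foldl
        (fun rep pr =>
          let col := pvVal grid pr.1
          if !rep.contains col
              || decide ((pvSizes (pvLab grid h w)).getD (rep.getD col 0) 0
                    < (pvSizes (pvLab grid h w)).getD pr.2 0)
              || ((pvSizes (pvLab grid h w)).getD pr.2 0
                    == (pvSizes (pvLab grid h w)).getD (rep.getD col 0) 0
                  && decide (pr.2 < rep.getD col 0))
          then rep.insert col pr.2 else rep) rep).keys,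
      ∃ ρ, ((ps.map (fun k => (k, (pvLab grid h w).getD k 0))).foldl
        (fun rep pr =>
          let col := pvVal grid pr.1
          if !rep.contains col
              || decide ((pvSizes (pvLab grid h w)).getD (rep.getD col 0) 0
                    < (pvSizes (pvLab grid h w)).getD pr.2 0)
              || ((pvSizes (pvLab grid h w)).getD pr.2 0
                    == (pvSizes (pvLab grid h w)).getD (rep.getD col 0) 0
                  && decide (pr.2 < rep.getD col 0))
          then rep.insert col pr.2 else rep) rep).getD c 0 = pvIdx w ρ ∧
        ρ ∈ pvGoods grid h w ∧ pvIsMin grid h w ρ ρ ∧ pvVal grid ρ = c ∧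
        ∀ p' ∈ procs ++ ps, pvVal grid p' = c → ∀ m, pvIsMin grid h w p' m →
          pvSzN grid h w m < pvSzN grid h w ρ ∨
            (pvSzN grid h w m = pvSzN grid h w ρ ∧ pvIdx w ρ ≤ pvIdx w m)) := by
  intro ps
  induction ps with
  | nil =>
    intro procs rep hps hK1 hK2
    simp only [List.map_nil, List.foldl_nil, List.append_nil]
    exact ⟨hK1, hK2⟩
  | cons p ps ih =>
    intro procs rep hps hK1 hK2
    have hpg := hps p List.mem_cons_self
    have hpb := (mem_pvGoods grid h w p).mp hpg
    obtain ⟨mp, hmp1, hmp2⟩ := reach_exists_min grid h w (pvVal grid p) p hpb.1 rfl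
    have hmpmin : pvIsMin grid h w p mp := ⟨hmp1, hmp2⟩
    obtain ⟨hmpg, hmpv, hmpself⟩ := isMin_props grid h w p mp hpg hmpmin
    have hgdp : (pvLab grid h w).getD p 0 = pvIdx w mp :=
      PySem.Dict.getD_of_get?_eq_some _ _ (pvLab_get grid h w hh hw p hpg mp hmpmin)
    have hszv : ∀ r : Int × Int,
        (pvSizes (pvLab grid h w)).getD (pvIdx w r) 0 = (pvSzN grid h w r : Int) :=
      fun r => sizes_getD grid h w hh hw (pvIdx w r)
    simp only [List.map_cons, List.foldl_cons]
    have hassoc : procs ++ p :: ps = (procs ++ [p]) ++ ps := by simp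
    rw [hassoc]
    set col := pvVal grid p with hcol
    -- analyze the conditional step
    by_cases hct : rep.contains col = true
    · -- color already present: the stored root is ρ
      have hck : col ∈ rep.keys := (PySem.Dict.contains_iff_mem_keys rep col).mp hct
      obtain ⟨ρ, hρ1, hρ2, hρ3, hρ4, hρ5⟩ := hK2 col hck
      have hcondeq : (!rep.contains col
            || decide ((pvSizes (pvLab grid h w)).getD (rep.getD col 0) 0
                  < (pvSizes (pvLab grid h w)).getD ((pvLab grid h w).getD p 0) 0)
            || ((pvSizes (pvLab grid h w)).getD ((pvLab grid h w).getD p 0) 0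
                  == (pvSizes (pvLab grid h w)).getD (rep.getD col 0) 0
                && decide ((pvLab grid h w).getD p 0 < rep.getD col 0))) = true
          ↔ (pvSzN grid h w ρ < pvSzN grid h w mp ∨
              (pvSzN grid h w mp = pvSzN grid h w ρ ∧ pvIdx w mp < pvIdx w ρ)) := by
        rw [hct, hρ1, hgdp, hszv ρ, hszv mp]
        simp only [Bool.not_true, Bool.false_or, Bool.or_eq_true, Bool.and_eq_true,
          decide_eq_true_eq, beq_iff_eq]
        constructor
        · rintro (h1 | ⟨h1, h2⟩)
          · left; exact_mod_cast h1
          · right; exact ⟨by exact_mod_cast h1, h2⟩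
        · rintro (h1 | ⟨h1, h2⟩)
          · left; exact_mod_cast h1
          · right; exact ⟨by exact_mod_cast h1, h2⟩
      by_cases hbetter : pvSzN grid h w ρ < pvSzN grid h w mp ∨
          (pvSzN grid h w mp = pvSzN grid h w ρ ∧ pvIdx w mp < pvIdx w ρ)
      · rw [if_pos (hcondeq.mpr hbetter)]
        apply ih (procs ++ [p]) (rep.insert col ((pvLab grid h w).getD p 0))
          (fun q hq => hps q (List.mem_cons_of_mem _ hq))
        · rw [PySem.Dict.keys_insert_of_contains _ _ hct, hK1, List.map_append]
          simp only [List.map_cons, List.map_nil]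
          rw [PySem.Set.ofList_append_singleton, PySem.Set.add_of_mem]
          rw [← hK1]; exact hck
        · intro c hc
          rw [PySem.Dict.keys_insert_of_contains _ _ hct] at hc
          by_cases hcc : c = col
          · subst hcc
            refine ⟨mp, ?_, hmpg, hmpself, by rw [hmpv], ?_⟩
            · rw [PySem.Dict.getD_insert, if_pos rfl, hgdp]
            · intro p' hp' hvp' m hm
              rcases List.mem_append.mp hp' with hp' | hp'
              · have := hρ5 p' hp' hvp' m hm
                omega
              · have : p' = p := by simpa using hp'
                subst this
                have : m = mp := reach_min_unique grid h w (pvVal grid p') p' m mp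
                  hpb.1 rfl hm.1 hm.2 hmpmin.1 hmpmin.2
                subst this
                omega
          · obtain ⟨ρ', b1, b2, b3, b4, b5⟩ := hK2 c hc
            refine ⟨ρ', ?_, b2, b3, b4, ?_⟩
            · rw [PySem.Dict.getD_insert, if_neg hcc]; exact b1
            · intro p' hp' hvp' m hm
              rcases List.mem_append.mp hp' with hp' | hp'
              · exact b5 p' hp' hvp' m hm
              · have : p' = p := by simpa using hp'
                subst this
                exact absurd hvp'.symm hcc
      · rw [if_neg (by rw [hcondeq]; exact hbetter)]
        apply ih (procs ++ [p]) rep (fun q hq => hps q (List.mem_cons_of_mem _ hq))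
        · rw [hK1, List.map_append]
          simp only [List.map_cons, List.map_nil]
          rw [PySem.Set.ofList_append_singleton, PySem.Set.add_of_mem]
          rw [← hK1]; exact hck
        · intro c hc
          obtain ⟨ρ', b1, b2, b3, b4, b5⟩ := hK2 c hc
          refine ⟨ρ', b1, b2, b3, b4, ?_⟩
          intro p' hp' hvp' m hm
          rcases List.mem_append.mp hp' with hp' | hp'
          · exact b5 p' hp' hvp' m hm
          · have : p' = p := by simpa using hp'
            subst this
            have : m = mp := reach_min_unique grid h w (pvVal grid p') p' m mp
              hpb.1 rfl hm.1 hm.2 hmpmin.1 hmpmin.2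
            subst this
            have hveq : c = col := hvp'.symm
            subst hveq
            -- ρ' is the stored root for col, i.e. ρ; and mp is not better
            have : ρ' = ρ := by
              have := hρ1
              rw [b1] at this
              have hb2 := (mem_pvGoods grid h w ρ').mp b2
              have hr2 := (mem_pvGoods grid h w ρ).mp hρ2
              exact pvIdx_inj h w ρ' ρ hb2.1 hr2.1 this
            subst this
            omega
    · -- fresh color
      have hct' : rep.contains col = false := by
        cases hcv : rep.contains col
        · rfl
        · exact absurd hcv hct
      rw [if_pos (by rw [hct']; simp)]
      apply ih (procs ++ [p]) (rep.insert col ((pvLab grid h w).getD p 0))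
        (fun q hq => hps q (List.mem_cons_of_mem _ hq))
      · have hct' : rep.contains col = false := by
          cases hcv : rep.contains col
          · rfl
          · exact absurd hcv hct
        rw [PySem.Dict.keys_insert_of_not_contains _ _ hct', hK1, List.map_append]
        simp only [List.map_cons, List.map_nil]
        rw [PySem.Set.ofList_append_singleton, PySem.Set.add_of_not_mem]
        rw [← hK1]
        exact fun hm => hct ((PySem.Dict.contains_iff_mem_keys rep col).mpr hm)
      · intro c hc
        rw [PySem.Dict.mem_keys_insert] at hc
        by_cases hcc : c = col
        · subst hcc
          refine ⟨mp, ?_, hmpg, hmpself, by rw [hmpv], ?_⟩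
          · rw [PySem.Dict.getD_insert, if_pos rfl, hgdp]
          · intro p' hp' hvp' m hm
            rcases List.mem_append.mp hp' with hp' | hp'
            · exfalso
              apply hct
              apply (PySem.Dict.contains_iff_mem_keys rep _).mpr
              rw [hK1, PySem.Set.mem_ofList]
              exact List.mem_map.mpr ⟨p', hp', hvp'⟩
            · have : p' = p := by simpa using hp'
              subst this
              have : m = mp := reach_min_unique grid h w (pvVal grid p') p' m mp
                hpb.1 rfl hm.1 hm.2 hmpmin.1 hmpmin.2
              subst this
              omega
        · have hc' : c ∈ rep.keys := by
            rcases hc with hc | hc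
            · exact absurd hc hcc
            · exact hc
          obtain ⟨ρ', b1, b2, b3, b4, b5⟩ := hK2 c hc'
          refine ⟨ρ', ?_, b2, b3, b4, ?_⟩
          · rw [PySem.Dict.getD_insert, if_neg hcc]; exact b1
          · intro p' hp' hvp' m hm
            rcases List.mem_append.mp hp' with hp' | hp'
            · exact b5 p' hp' hvp' m hm
            · have : p' = p := by simpa using hp'
              subst this
              exact absurd hvp'.symm hcc

-- ---- the two pair searches agree whenever the adjacency predicates agree ----

theorem findInner_eq_gen (ld : PySem.Dict Int (List (Int × Int))) (ca : Int)
    (pB : Int → Int → Bool) :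
    ∀ (K : List Int),
    (∀ cb ∈ K, (ca != cb && adjA (ld.getD ca []) (ld.getD cb [])) = (ca != cb && pB ca cb)) →
    ((K.map (fun cb => (ca, cb))).find? (fun p => p.1 != p.2 && pB p.1 p.2))
      = (findInnerA ld ca K).map (fun cb => (ca, cb)) := by
  intro K
  induction K with
  | nil => intro _; rfl
  | cons cb K ihK =>
    intro hpred
    simp only [List.map_cons, List.find?_cons, findInnerA]
    by_cases hp : (ca != cb && adjA (ld.getD ca []) (ld.getD cb [])) = true
    · rw [if_pos hp]
      have : (ca != cb && pB ca cb) = true := by rw [← hpred cb List.mem_cons_self]; exact hp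
      simp only [this]
      rfl
    · rw [if_neg hp]
      have hfalse : (ca != cb && pB ca cb) = false := by
        rw [← hpred cb List.mem_cons_self]
        cases hv : (ca != cb && adjA (ld.getD ca []) (ld.getD cb []))
        · rfl
        · exact absurd hv hp
      simp only [hfalse]
      exact ihK (fun c hc => hpred c (List.mem_cons_of_mem _ hc))

theorem findPair_eq_gen (ld : PySem.Dict Int (List (Int × Int))) (pB : Int → Int → Bool)
    (K : List Int)
    (hpred : ∀ ca ∈ K, ∀ cb ∈ K,
        (ca != cb && adjA (ld.getD ca []) (ld.getD cb [])) = (ca != cb && pB ca cb)) :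
    ∀ (Krest : List Int), (∀ a ∈ Krest, a ∈ K) →
    ((Krest.flatMap (fun a => K.map (fun b => (a, b)))).find?
        (fun p => p.1 != p.2 && pB p.1 p.2))
      = findPairA ld K Krest := by
  intro Krest
  induction Krest with
  | nil => intro _; rfl
  | cons a Krest ihK =>
    intro hsub
    simp only [List.flatMap_cons, List.find?_append, findPairA]
    rw [findInner_eq_gen ld a pB K (fun cb hcb => hpred a (hsub a List.mem_cons_self) cb hcb)]
    cases hf : findInnerA ld a K with
    | some cb => simp
    | none =>
      simp only [Option.map_none, Option.none_or]
      exact ihK (fun b hb => hsub b (List.mem_cons_of_mem _ hb))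

-- ---- B's rebuilt grid, cell by cell (membership expressed by Bool predicates) ----

theorem alt_build (grid : List (List Int)) (FS FT : (Int × Int) → Bool) (src : Int) :
    ((PySem.List.enumerate grid).map (fun rrow =>
      (PySem.List.enumerate rrow.2).map (fun cv =>
        if FS (rrow.1, cv.1) then 0
        else if FT (rrow.1, cv.1) then src
        else cv.2))).length = grid.length ∧
    (∀ r : Nat, (((PySem.List.enumerate grid).map (fun rrow =>
      (PySem.List.enumerate rrow.2).map (fun cv =>
        if FS (rrow.1, cv.1) then 0
        else if FT (rrow.1, cv.1) then src
        else cv.2))).getD r []).length = (grid.getD r []).length) ∧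
    (∀ r c : Nat, r < grid.length → c < (grid.getD r []).length →
      (((PySem.List.enumerate grid).map (fun rrow =>
        (PySem.List.enumerate rrow.2).map (fun cv =>
          if FS (rrow.1, cv.1) then 0
          else if FT (rrow.1, cv.1) then src
          else cv.2))).getD r []).getD c 0
        = if FS ((r : Int), (c : Int)) = true then 0
          else if FT ((r : Int), (c : Int)) = true then src
          else (grid.getD r []).getD c 0) := by
  have hlen : ∀ (l : List (List Int)),
      ((PySem.List.enumerate l).map (fun rrow =>
        (PySem.List.enumerate rrow.2).map (fun cv =>
          if FS (rrow.1, cv.1) then 0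
          else if FT (rrow.1, cv.1) then src
          else cv.2))).length = l.length := by
    intro l
    rw [List.length_map, PySem.List.length_enumerate]
  refine ⟨hlen grid, fun r => ?_, fun r c hrlt hclt => ?_⟩
  · by_cases hrl : r < grid.length
    · rw [List.getD_eq_getElem _ _ (by rw [hlen grid]; exact hrl), List.getElem_map,
        PySem.List.getElem_enumerate, List.length_map, PySem.List.length_enumerate,
        List.getD_eq_getElem _ _ hrl]
    · rw [List.getD_eq_default _ _ (by rw [hlen grid]; omega),
        List.getD_eq_default _ _ (by omega)]
  · have hclt' : c < grid[r].length := by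
      rw [← List.getD_eq_getElem grid [] hrlt]; exact hclt
    have hrow : ((PySem.List.enumerate grid).map (fun rrow =>
        (PySem.List.enumerate rrow.2).map (fun cv =>
          if FS (rrow.1, cv.1) then 0
          else if FT (rrow.1, cv.1) then src
          else cv.2))).getD r []
        = (PySem.List.enumerate grid[r]).map (fun cv =>
          if FS (((0 : Int) + (r : Int)), cv.1) then 0
          else if FT (((0 : Int) + (r : Int)), cv.1) then src
          else cv.2) := by
      rw [List.getD_eq_getElem _ _ (by rw [hlen grid]; exact hrlt), List.getElem_map,
        PySem.List.getElem_enumerate]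
    rw [hrow]
    have hcell : ((PySem.List.enumerate grid[r]).map (fun cv =>
          if FS (((0 : Int) + (r : Int)), cv.1) then 0
          else if FT (((0 : Int) + (r : Int)), cv.1) then src
          else cv.2)).getD c 0
        = (if FS (((0 : Int) + (r : Int)), ((0 : Int) + (c : Int))) then 0
          else if FT (((0 : Int) + (r : Int)), ((0 : Int) + (c : Int))) then src
          else grid[r][c]) := by
      rw [List.getD_eq_getElem _ _ (by rw [List.length_map, PySem.List.length_enumerate]; exact hclt'),
        List.getElem_map, PySem.List.getElem_enumerate]
    rw [hcell]
    simp only [Int.zero_add]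
    rw [List.getD_eq_getElem grid [] hrlt, List.getD_eq_getElem _ 0 hclt']

set_option maxHeartbeats 2000000 in
theorem transform_eq (grid : List (List Int)) : transform grid = transform_alt grid := by
  have hh : (PySem.List.len grid).toNat = grid.length := by
    rw [PySem.List.len_eq]; exact Int.toNat_natCast _
  have hw : (PySem.List.len (PySem.List.pyGetD grid 0 [])).toNat = (grid.headD []).length := by
    rw [pyGetD_zero_headD, PySem.List.len_eq]; exact Int.toNat_natCast _
  set h := PySem.List.len grid with hhdef
  set w := PySem.List.len (PySem.List.pyGetD grid 0 []) with hwdef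
  -- ===== A side: scan characterization =====
  set d := (scanA grid h w (pvCells h w) [] PySem.Dict.empty).2 with hd
  obtain ⟨roots, hkeysd0, hroots, hmins0, hpw, hcomps⟩ :=
    scanA_char grid h w hh hw (pvCells h w) [] [] [] PySem.Dict.empty
      (by simp)
      (by simp)
      (by simp)
      (by simp)
      (by simp)
      (by simp)
      (by
        intro c Ls hLs
        rw [PySem.Dict.get?_empty] at hLs
        exact absurd hLs (by simp))
  have hkeysd : d.keys = PySem.Set.ofList ((pvGoods grid h w).map (pvVal grid)) := by
    rw [hd, hkeysd0]
    rfl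
  have hmins : ∀ p ∈ pvGoods grid h w, ∀ m, pvIsMin grid h w p m → m ∈ roots := by
    intro p hp m hm
    exact hmins0 p (by simpa using List.mem_of_mem_filter hp) hp m hm
  have hnd : d.keys.Nodup := by rw [hkeysd]; exact PySem.Set.nodup_ofList _
  obtain ⟨hldkeys, hldget⟩ := ld_facts d hnd
  set ld : PySem.Dict Int (List (Int × Int)) :=
    d.items.foldl (fun acc p => acc.insert p.1 (pvMaxByLen p.2)) PySem.Dict.empty with hld
  -- per-color data: A's largest component belongs to the best root of that color
  have hcolor : ∀ c ∈ d.keys, ∃ Ls ρ, d.get? c = some Ls ∧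
      ld.get? c = some (pvMaxByLen Ls) ∧ pvCompOK grid h w (pvMaxByLen Ls) ρ ∧
      pvBest grid h w c ρ := by
    intro c hc
    have hcont : d.contains c = true := (PySem.Dict.contains_iff_mem_keys d c).mpr hc
    obtain ⟨Ls, hLs⟩ : ∃ Ls, d.get? c = some Ls := by
      have := PySem.Dict.contains_eq_isSome_get? (d := d) (k := c)
      rw [hcont] at this
      exact Option.isSome_iff_exists.mp this.symm
    obtain ⟨hLsne, hF⟩ := hcomps c Ls (by rw [← hd]; exact hLs)
    match Ls, hLsne with
    | L0 :: Ls', _ =>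
    obtain ⟨r0, rsC', hOK0, hF', hrsC⟩ : ∃ r0 rsC', pvCompOK grid h w L0 r0 ∧
        List.Forall₂ (pvCompOK grid h w) Ls' rsC' ∧
        roots.filter (fun r => pvVal grid r == c) = r0 :: rsC' := by
      generalize hG : roots.filter (fun r => pvVal grid r == c) = rs at hF
      cases hF with
      | cons h1 h2 => exact ⟨_, _, h1, h2, rfl⟩
    have hsubroots : ∀ r ∈ r0 :: rsC', r ∈ roots ∧ pvVal grid r = c := by
      intro r hr
      have : r ∈ roots.filter (fun r => pvVal grid r == c) := by rw [hrsC]; exact hr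
      have hm := List.mem_filter.mp this
      exact ⟨hm.1, by simpa using hm.2⟩
    have hg : ∀ r ∈ r0 :: rsC', r ∈ pvGoods grid h w ∧ pvIsMin grid h w r r := by
      intro r hr
      exact hroots r (hsubroots r hr).1
    have hpwf : (r0 :: rsC').Pairwise (fun a b => pvIdx w a < pvIdx w b) := by
      rw [← hrsC]
      exact hpw.filter _
    obtain ⟨ρ, hρmem, hρOK, hρbest⟩ :=
      maxfold_spec grid h w hh hw rsC' Ls' hF' L0 r0 hOK0 hg hpwf
    refine ⟨L0 :: Ls', ρ, hLs, hldget c (L0 :: Ls') hLs, hρOK, ?_⟩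
    have hρg := hg ρ hρmem
    refine ⟨hρg.1, hρg.2, (hsubroots ρ hρmem).2, ?_⟩
    intro r' hr'g hr'min hr'v
    have hr'roots : r' ∈ roots := hmins r' hr'g r' hr'min
    have hr'mem : r' ∈ r0 :: rsC' := by
      rw [← hrsC]
      rw [List.mem_filter]
      exact ⟨hr'roots, by simpa using hr'v⟩
    exact hρbest r' hr'mem
  -- ===== B side: label map, sizes, rep =====
  obtain ⟨hJ, hfix⟩ := pvLab_spec grid h w hh hw
  have hklab : (pvLab grid h w).keys.Nodup := by
    rw [hJ.1]; exact nodup_pvGoods grid h w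
  set rep := pvRep grid (pvLab grid h w) (pvSizes (pvLab grid h w)) with hrepdef
  have hrepfold := rep_fold grid h w hh hw (pvGoods grid h w) [] PySem.Dict.empty
    (fun p hp => hp)
    (by simp)
    (by intro c hc; rw [PySem.Dict.keys_empty] at hc; exact absurd hc (by simp))
  have hrepeq : rep = (((pvGoods grid h w).map
      (fun k => (k, (pvLab grid h w).getD k 0))).foldl
        (fun rep pr =>
          let col := pvVal grid pr.1
          if !rep.contains col
              || decide ((pvSizes (pvLab grid h w)).getD (rep.getD col 0) 0
                    < (pvSizes (pvLab grid h w)).getD pr.2 0)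
              || ((pvSizes (pvLab grid h w)).getD pr.2 0
                    == (pvSizes (pvLab grid h w)).getD (rep.getD col 0) 0
                  && decide (pr.2 < rep.getD col 0))
          then rep.insert col pr.2 else rep) PySem.Dict.empty) := by
    rw [hrepdef]
    unfold pvRep
    rw [PySem.Dict.items_eq_map_keys (pvLab grid h w) hklab 0, hJ.1]
  have hrepkeys : rep.keys = PySem.Set.ofList ((pvGoods grid h w).map (pvVal grid)) := by
    rw [hrepeq]
    have := hrepfold.1
    simpa using this
  have hrepc : ∀ c ∈ rep.keys, ∃ ρ, rep.getD c 0 = pvIdx w ρ ∧ pvBest grid h w c ρ := by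
    intro c hc
    obtain ⟨ρ, b1, b2, b3, b4, b5⟩ := hrepfold.2 c (by rw [hrepeq] at hc; exact hc)
    refine ⟨ρ, by rw [hrepeq]; exact b1, b2, b3, b4, ?_⟩
    intro r' hr'g hr'min hr'v
    exact b5 r' (by simpa using hr'g) hr'v r' hr'min
  have hKK : ld.keys = rep.keys := by rw [hldkeys, hkeysd, hrepkeys]
  -- membership of a component list via a label lookup
  have hFSmem : ∀ (ρ : Int × Int) (L : List (Int × Int)),
      ρ ∈ pvGoods grid h w → pvIsMin grid h w ρ ρ → pvCompOK grid h w L ρ →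
      ∀ z, ((pvLab grid h w).get? z == some (pvIdx w ρ)) = true ↔ z ∈ L := by
    intro ρ L hρg hρmin hOK z
    rw [beq_iff_eq, pvLab_class grid h w hh hw ρ hρg hρmin z, hOK.2 z]
    have hρb := (mem_pvGoods grid h w ρ).mp hρg
    constructor
    · exact fun hx => hx.2
    · intro hx
      have hzp := pvReach_prop grid h w (pvVal grid ρ) [] ρ z hρb.1 rfl (by simp) hx
      exact ⟨(mem_pvGoods grid h w z).mpr ⟨hzp.1, by rw [hzp.2.1]; exact hρb.2⟩, hx⟩
  -- the adjacency predicates agree on the colors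
  have hadj : ∀ ca ∈ ld.keys, ∀ cb ∈ ld.keys,
      (ca != cb && adjA (ld.getD ca []) (ld.getD cb []))
        = (ca != cb && pvAdjB (pvLab grid h w) (rep.getD ca 0) (rep.getD cb 0)) := by
    intro ca hca cb hcb
    by_cases hee : ca = cb
    · subst hee; simp
    · obtain ⟨Lsa, ρa, hga, hlda, hOKa, hBa⟩ := hcolor ca (by rw [← hldkeys]; exact hca)
      obtain ⟨Lsb, ρb, hgb, hldb, hOKb, hBb⟩ := hcolor cb (by rw [← hldkeys]; exact hcb)
      obtain ⟨ρa', ha1, ha2⟩ := hrepc ca (by rw [← hKK]; exact hca)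
      obtain ⟨ρb', hb1, hb2⟩ := hrepc cb (by rw [← hKK]; exact hcb)
      have hea : ρa' = ρa := pvBest_unique grid h w ca ρa' ρa ha2 hBa
      have heb : ρb' = ρb := pvBest_unique grid h w cb ρb' ρb hb2 hBb
      rw [hea] at ha1 ha2
      rw [heb] at hb1 hb2
      congr 1
      apply bool_eq_of_iff
      rw [PySem.Dict.getD_of_get?_eq_some _ _ hlda, PySem.Dict.getD_of_get?_eq_some _ _ hldb]
      unfold adjA pvAdjB
      rw [ha1, hb1]
      simp only [List.any_eq_true, contains_cell, decide_eq_true_eq, Bool.and_eq_true]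
      constructor
      · rintro ⟨a, haL, y, hy, hyL⟩
        refine ⟨(a, (pvLab grid h w).getD a 0), ?_, ?_, y, hy, ?_⟩
        · rw [PySem.Dict.items_eq_map_keys (pvLab grid h w) hklab 0, hJ.1]
          have haG : a ∈ pvGoods grid h w := by
            have := (hFSmem ρa (pvMaxByLen Lsa) ha2.1 ha2.2.1 hOKa a).mpr haL
            rw [beq_iff_eq, pvLab_class grid h w hh hw ρa ha2.1 ha2.2.1 a] at this
            exact this.1
          exact List.mem_map.mpr ⟨a, haG, rfl⟩
        · show ((pvLab grid h w).getD a 0 == pvIdx w ρa) = true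
          have hsome := (hFSmem ρa (pvMaxByLen Lsa) ha2.1 ha2.2.1 hOKa a).mpr haL
          rw [beq_iff_eq] at hsome ⊢
          exact PySem.Dict.getD_of_get?_eq_some _ _ hsome
        · exact (hFSmem ρb (pvMaxByLen Lsb) hb2.1 hb2.2.1 hOKb y).mpr hyL
      · rintro ⟨pr, hpr, hpr2, y, hy, hyl⟩
        rw [PySem.Dict.items_eq_map_keys (pvLab grid h w) hklab 0, hJ.1] at hpr
        obtain ⟨k, hkG, rfl⟩ := List.mem_map.mp hpr
        refine ⟨k, ?_, y, hy, (hFSmem ρb (pvMaxByLen Lsb) hb2.1 hb2.2.1 hOKb y).mp hyl⟩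
        apply (hFSmem ρa (pvMaxByLen Lsa) ha2.1 ha2.2.1 hOKa k).mp
        have hpr2' : (pvLab grid h w).getD k 0 = pvIdx w ρa := by simpa using hpr2
        show ((pvLab grid h w).get? k == some (pvIdx w ρa)) = true
        rw [beq_iff_eq]
        obtain ⟨q, _, hq2, _⟩ := hJ.2 k hkG
        rw [hq2, ← hpr2', PySem.Dict.getD_of_get?_eq_some _ _ hq2]
  have hfind := findPair_eq_gen ld
    (fun a b => pvAdjB (pvLab grid h w) (rep.getD a 0) (rep.getD b 0)) ld.keys hadj
    ld.keys (fun a ha => ha)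
  -- ===== unfold both programs =====
  show (match findPairA ld ld.keys ld.keys with
    | none => grid
    | some (src, tgt) =>
      (ld.getD tgt []).foldl (fun g x => pvSet2 g x src)
        ((ld.getD src []).foldl (fun g x => pvSet2 g x 0) grid))
    = (match (rep.keys.flatMap (fun ca => rep.keys.map (fun cb => (ca, cb)))).find?
        (fun pr => pr.1 != pr.2 &&
          pvAdjB (pvLab grid h w) (rep.getD pr.1 0) (rep.getD pr.2 0)) with
    | none => grid
    | some (src, tgt) =>
      (PySem.List.enumerate grid).map (fun rrow =>
        (PySem.List.enumerate rrow.2).map (fun cv =>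
          if (pvLab grid h w).get? (rrow.1, cv.1) == some (rep.getD src 0) then 0
          else if (pvLab grid h w).get? (rrow.1, cv.1) == some (rep.getD tgt 0) then src
          else cv.2)))
  rw [← hKK, hfind]
  cases hfp : findPairA ld ld.keys ld.keys with
  | none => rfl
  | some pr =>
    obtain ⟨src, tgt⟩ := pr
    dsimp only
    obtain ⟨hsrcmem, hinner⟩ := findPairA_some ld ld.keys ld.keys src tgt hfp
    obtain ⟨htgtmem, hguard⟩ := findInnerA_some ld src ld.keys tgt hinner
    have hsneq : src ≠ tgt := by
      simp only [Bool.and_eq_true, bne_iff_ne] at hguard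
      exact hguard.1
    obtain ⟨LsS, ρS, hgS, hldS, hOKS, hBS⟩ := hcolor src (by rw [← hldkeys]; exact hsrcmem)
    obtain ⟨LsT, ρT, hgT, hldT, hOKT, hBT⟩ := hcolor tgt (by rw [← hldkeys]; exact htgtmem)
    obtain ⟨ρS', hS1, hS2⟩ := hrepc src (by rw [← hKK]; exact hsrcmem)
    obtain ⟨ρT', hT1, hT2⟩ := hrepc tgt (by rw [← hKK]; exact htgtmem)
    have heS : ρS' = ρS := pvBest_unique grid h w src ρS' ρS hS2 hBS
    have heT : ρT' = ρT := pvBest_unique grid h w tgt ρT' ρT hT2 hBT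
    rw [heS] at hS1 hS2
    rw [heT] at hT1 hT2
    set S := pvMaxByLen LsS with hSdef
    set T := pvMaxByLen LsT with hTdef
    rw [PySem.Dict.getD_of_get?_eq_some _ _ hldS, PySem.Dict.getD_of_get?_eq_some _ _ hldT]
    -- membership of the write sets through the label predicates
    have hFS : ∀ z, ((pvLab grid h w).get? z == some (rep.getD src 0)) = true ↔ z ∈ S := by
      intro z
      rw [hS1]
      exact hFSmem ρS S hBS.1 hBS.2.1 hOKS z
    have hFT : ∀ z, ((pvLab grid h w).get? z == some (rep.getD tgt 0)) = true ↔ z ∈ T := by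
      intro z
      rw [hT1]
      exact hFSmem ρT T hBT.1 hBT.2.1 hOKT z
    -- cells of the two components are in-bounds nonzero cells of the right colors
    have hmemS : ∀ z ∈ S, pvInB h w z = true ∧ pvVal grid z = src := by
      intro z hz
      have hρb := (mem_pvGoods grid h w ρS).mp hBS.1
      have hzp := pvReach_prop grid h w (pvVal grid ρS) [] ρS z hρb.1 rfl (by simp)
        ((hOKS.2 z).mp hz)
      exact ⟨hzp.1, by rw [hzp.2.1]; exact hBS.2.2.1⟩
    have hmemT : ∀ z ∈ T, pvInB h w z = true ∧ pvVal grid z = tgt := by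
      intro z hz
      have hρb := (mem_pvGoods grid h w ρT).mp hBT.1
      have hzp := pvReach_prop grid h w (pvVal grid ρT) [] ρT z hρb.1 rfl (by simp)
        ((hOKT.2 z).mp hz)
      exact ⟨hzp.1, by rw [hzp.2.1]; exact hBT.2.2.1⟩
    have hsrc0 : src ≠ 0 := by
      have := (mem_pvGoods grid h w ρS).mp hBS.1
      rw [← hBS.2.2.1]
      exact this.2
    have htgt0 : tgt ≠ 0 := by
      have := (mem_pvGoods grid h w ρT).mp hBT.1
      rw [← hBT.2.2.1]
      exact this.2
    have hST : ∀ z, z ∈ S → z ∈ T → False := by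
      intro z hzS hzT
      exact hsneq ((hmemS z hzS).2 ▸ (hmemT z hzT).2 ▸ rfl)
    -- A's two write passes
    have hokS : ∀ x ∈ S, pvOk grid x := fun x hx =>
      pvOk_of grid h w hh x (hmemS x hx).1 (by rw [(hmemS x hx).2]; exact hsrc0)
    have foldS := fold_set2 0 S grid hokS
    have hokT : ∀ x ∈ T, pvOk (S.foldl (fun g x => pvSet2 g x 0) grid) x := by
      intro x hx
      obtain ⟨k1, k2, k3, k4⟩ :=
        pvOk_of grid h w hh x (hmemT x hx).1 (by rw [(hmemT x hx).2]; exact htgt0)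
      exact ⟨k1, by rw [foldS.1]; exact k2, k3, by rw [foldS.2.1]; exact k4⟩
    have foldT := fold_set2 src T (S.foldl (fun g x => pvSet2 g x 0) grid) hokT
    have altb := alt_build grid
      (fun z => (pvLab grid h w).get? z == some (rep.getD src 0))
      (fun z => (pvLab grid h w).get? z == some (rep.getD tgt 0)) src
    apply grids_eq
    · rw [foldT.1, foldS.1, altb.1]
    · intro r
      rw [foldT.2.1 r, foldS.2.1 r, altb.2.1 r]
    · intro r c hrlt hclt
      rw [foldT.1, foldS.1] at hrlt
      rw [foldT.2.1 r, foldS.2.1 r] at hclt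
      rw [foldT.2.2 r c, foldS.2.2 r c, altb.2.2 r c hrlt hclt]
      by_cases h1 : ((r : Int), (c : Int)) ∈ T
      · rw [if_pos h1]
        have hns : ((r : Int), (c : Int)) ∉ S := fun hc => hST _ hc h1
        rw [if_neg (fun hc => hns ((hFS _).mp hc)), if_pos ((hFT _).mpr h1)]
      · rw [if_neg h1]
        by_cases h2 : ((r : Int), (c : Int)) ∈ S
        · rw [if_pos h2, if_pos ((hFS _).mpr h2)]
        · rw [if_neg h2, if_neg (fun hc => h2 ((hFS _).mp hc)),
            if_neg (fun hc => h1 ((hFT _).mp hc))]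

-- ===== VERDICT (by name: the statement is the Claim_ definition above) =====
theorem transform_spec : Claim_equal_transform := by
  intro grid _ _
  unfold Spec_transform
  exact transform_eq grid
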